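-- pv_equiv track=rewrite | github.com/AyanMajumdar100/data-structures-and-algorithms | PYTHON/MinHammingDist.py | minimum_hamming_distance
-- ===== SOURCE A (Python) =====
-- from collections import defaultdict, Counter
--
-- def minimum_hamming_distance(source: list[int], target: list[int], allowed_swaps: list[list[int]]) -> int:
--     n = len(source)
--     parent = list(range(n))
--
--     # DSU Find with path compression
--     def find(x: int) -> int:
--         if parent[x] != x:
--             parent[x] = find(parent[x])
--         return parent[x]
--
--     # DSU Union
--     def union(x: int, y: int):
--         root_x = find(x)
--         root_y = find(y)
--         if root_x != root_y:
--             parent[root_x] = root_y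
--
--     # Group indices into connected components
--     for u, v in allowed_swaps:
--         union(u, v)
--
--     # Build frequency maps for each component using Python's Counter
--     # Key is the component root, Value is a Counter of source elements in that component
--     component_counts = defaultdict(Counter)
--     for i in range(n):
--         root = find(i)
--         component_counts[root][source[i]] += 1
--
--     hamming_distance = 0
--
--     # Verify if target elements exist in their respective components
--     for i in range(n):
--         root = find(i)
--
--         # If the required target element is available in this component pool
--         if component_counts[root][target[i]] > 0:
--             component_counts[root][target[i]] -= 1  # Consume it
--         else:
--             # Missing element translates to +1 Hamming distance
--             hamming_distance += 1
--
--     return hamming_distance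
-- ===== SOURCE B (Python) =====
-- from collections import Counter, defaultdict
--
--
-- def minimum_hamming_distance(source: list[int], target: list[int], allowed_swaps: list[list[int]]) -> int:
--     # Graph traversal instead of union-find: build an adjacency list, label each
--     # connected component with an explicit-stack DFS (isolated indices become
--     # singleton components), group the indices by label, and per component add
--     # its size minus the multiset overlap of its source/target values.
--     n = len(source)
--     adj = [[] for _ in range(n)]
--     for u, v in allowed_swaps:
--         adj[u].append(v)
--         adj[v].append(u)
--     comp_id = [-1] * n
--     c = 0
--     for s in range(n):
--         if comp_id[s] != -1:
--             continue
--         comp_id[s] = c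
--         stack = [s]
--         while stack:
--             x = stack.pop()
--             for y in adj[x]:
--                 if comp_id[y] == -1:
--                     comp_id[y] = c
--                     stack.append(y)
--         c += 1
--     groups = defaultdict(list)
--     for i in range(n):
--         groups[comp_id[i]].append(i)
--     total = 0
--     for idxs in groups.values():
--         src = Counter(source[i] for i in idxs)
--         tgt = Counter(target[i] for i in idxs)
--         total += len(idxs) - sum(min(cnt, tgt[v]) for v, cnt in src.items())
--     return total
-- ===== Notes on version B (the rewrite author's own statement) =====
-- stated objective: alternative
-- what changed: Replaces A's recursive path-compressed union-find plus greedy per-index Counter consumption by an adjacency-list graph, explicit-stack DFS component labelling, and a per-component multiset-overlap (sum of min counts) computation.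
import Mathlib
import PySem

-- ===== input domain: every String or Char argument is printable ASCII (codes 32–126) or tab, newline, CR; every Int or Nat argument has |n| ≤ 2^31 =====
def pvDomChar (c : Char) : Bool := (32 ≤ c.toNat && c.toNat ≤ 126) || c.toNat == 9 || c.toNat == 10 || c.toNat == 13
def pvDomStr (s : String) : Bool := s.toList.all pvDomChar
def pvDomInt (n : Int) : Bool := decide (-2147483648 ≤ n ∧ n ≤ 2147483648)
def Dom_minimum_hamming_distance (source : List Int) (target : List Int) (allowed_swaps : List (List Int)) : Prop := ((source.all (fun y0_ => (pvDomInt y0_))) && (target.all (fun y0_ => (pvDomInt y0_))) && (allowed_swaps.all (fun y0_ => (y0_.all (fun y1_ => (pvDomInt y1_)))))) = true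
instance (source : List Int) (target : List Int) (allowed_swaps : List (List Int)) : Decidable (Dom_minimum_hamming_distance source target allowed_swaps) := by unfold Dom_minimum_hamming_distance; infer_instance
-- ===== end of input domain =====

-- B replaces A's recursive path-compressed union-find and greedy per-index Counter
-- consumption by an adjacency-list graph, explicit-stack DFS component labelling,
-- and a per-component multiset-overlap count (objective: alternative algorithm).

-- ===== PORT A =====

-- DSU find with path compression; the fuel only bounds the recursion depth
-- (Python recursion terminates on every input admitted by Pre_, and the chain
-- length is < fuel there, so the fuel branch is never taken).
def pvFind : Nat → List Int → Int → Int × List Int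
  | 0, _p, x => (x, _p)
  | fuel+1, p, x =>
    let px := PySem.List.pyGetD p x 0
    if px ≠ x then
      let rp := pvFind fuel p px
      let p2 := PySem.List.pySetD rp.2 x rp.1
      (PySem.List.pyGetD p2 x 0, p2)
    else (px, p)

def pvUnion (p : List Int) (x y : Int) : List Int :=
  let r1 := pvFind (p.length + 1) p x
  let r2 := pvFind (r1.2.length + 1) r1.2 y
  if r1.1 ≠ r2.1 then PySem.List.pySetD r2.2 r1.1 r2.1 else r2.2

-- one step of "for u, v in allowed_swaps: union(u, v)" (a row that is not a pair raises; outside Pre_)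
def pvAStepF (p : List Int) (e : List Int) : List Int :=
  match e with
  | [u, v] => pvUnion p u v
  | _ => p

-- one step of "component_counts[find(i)][source[i]] += 1" (find keeps mutating parent)
def pvP1Step (source : List Int) (st : List Int × PySem.Dict Int (PySem.Dict Int Int)) (i : Int) :
    List Int × PySem.Dict Int (PySem.Dict Int Int) :=
  let rp := pvFind (st.1.length + 1) st.1 i
  (rp.2, st.2.modify rp.1 PySem.Dict.empty
    (fun c => c.modify (PySem.List.pyGetD source i 0) 0 (· + 1)))

-- one step of the second pass: consume target[i] from the pool or count a miss
def pvP2Step (target : List Int) (st : List Int × PySem.Dict Int (PySem.Dict Int Int) × Int)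
    (i : Int) : List Int × PySem.Dict Int (PySem.Dict Int Int) × Int :=
  let rp := pvFind (st.1.length + 1) st.1 i
  let c := st.2.1.getD rp.1 PySem.Dict.empty
  if c.getD (PySem.List.pyGetD target i 0) 0 > 0 then
    (rp.2, st.2.1.insert rp.1 (c.modify (PySem.List.pyGetD target i 0) 0 (· - 1)), st.2.2)
  else (rp.2, st.2.1, st.2.2 + 1)

def minimum_hamming_distance (source : List Int) (target : List Int) (allowed_swaps : List (List Int)) : Int :=
  let n := source.length
  let parent0 := PySem.List.pyRange 0 n 1
  let parent1 := allowed_swaps.foldl pvAStepF parent0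
  let s1 := (PySem.List.pyRange 0 n 1).foldl (pvP1Step source) (parent1, PySem.Dict.empty)
  let s2 := (PySem.List.pyRange 0 n 1).foldl (pvP2Step target) (s1.1, s1.2, 0)
  s2.2.2

-- ===== PORT B =====

-- "adj[u].append(v); adj[v].append(u)" (a row that is not a pair raises; outside Pre_)
def pvAdjStep (adj : List (List Int)) (e : List Int) : List (List Int) :=
  match e with
  | [u, v] =>
    let adj1 := PySem.List.pySetD adj u (PySem.List.pyGetD adj u [] ++ [v])
    PySem.List.pySetD adj1 v (PySem.List.pyGetD adj1 v [] ++ [u])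
  | _ => adj

-- "if comp_id[y] == -1: comp_id[y] = c; stack.append(y)"
def pvDfsVisit (c : Int) (p : List Int × List Int) (y : Int) : List Int × List Int :=
  if PySem.List.pyGetD p.1 y (-1) = -1 then (PySem.List.pySetD p.1 y c, p.2 ++ [y]) else p

-- the "while stack:" loop; the fuel only bounds the iteration count (under Pre_
-- the loop runs at most n+1 times, so the fuel branch is never taken)
def pvDfs (adj : List (List Int)) (c : Int) : Nat → List Int → List Int → List Int
  | 0, cid, _ => cid
  | fuel+1, cid, stack =>
    match PySem.List.pop? stack with
    | none => cid
    | some (x, rest) =>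
      let st := (PySem.List.pyGetD adj x []).foldl (pvDfsVisit c) (cid, rest)
      pvDfs adj c fuel st.1 st.2

-- one step of "for s in range(n): … DFS from s …"
def pvLabelStep (adj : List (List Int)) (n : Nat) (st : List Int × Int) (s : Int) : List Int × Int :=
  if PySem.List.pyGetD st.1 s (-1) ≠ -1 then st
  else (pvDfs adj st.2 (n + 1) (PySem.List.pySetD st.1 s st.2) [s], st.2 + 1)

def minimum_hamming_distance_alt (source : List Int) (target : List Int) (allowed_swaps : List (List Int)) : Int :=
  let n := source.length
  let adj := allowed_swaps.foldl pvAdjStep (List.replicate n ([] : List Int))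
  let cid := ((PySem.List.pyRange 0 (n : Int) 1).foldl (pvLabelStep adj n)
      (List.replicate n (-1 : Int), 0)).1
  let groups := (PySem.List.pyRange 0 (n : Int) 1).foldl
      (fun (g : PySem.Dict Int (List Int)) i =>
        g.modify (PySem.List.pyGetD cid i (-1)) [] (fun l => l ++ [i])) PySem.Dict.empty
  groups.values.foldl (fun total idxs =>
      let src := PySem.Dict.counter (idxs.map (fun i => PySem.List.pyGetD source i 0))
      let tgt := PySem.Dict.counter (idxs.map (fun i => PySem.List.pyGetD target i 0))
      total + ((idxs.length : Int)
        - src.items.foldl (fun s kv => s + min kv.2 (tgt.getD kv.1 0)) 0)) 0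

-- ===== PRECONDITION & SPEC =====
-- Pre_ excludes exactly the inputs on which A raises: a target shorter than
-- source (IndexError on target[i]), a swap row that is not a pair (unpack
-- ValueError), and a swap index outside Python's accepted range [-n, n)
-- (IndexError on parent[x]).
def Pre_minimum_hamming_distance (source : List Int) (target : List Int) (allowed_swaps : List (List Int)) : Prop :=
  source.length ≤ target.length ∧
  ∀ e ∈ allowed_swaps, e.length = 2 ∧
    ∀ x ∈ e, -(source.length : Int) ≤ x ∧ x < (source.length : Int)
instance (source : List Int) (target : List Int) (allowed_swaps : List (List Int)) : Decidable (Pre_minimum_hamming_distance source target allowed_swaps) := by unfold Pre_minimum_hamming_distance; infer_instance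

def pvWitness_minimum_hamming_distance : List Int × List Int × List (List Int) :=
  ([1, 2, 3], [3, 2, 1], [[0, 2]])

def Spec_minimum_hamming_distance (source : List Int) (target : List Int) (allowed_swaps : List (List Int)) (out : Int) : Prop := out = minimum_hamming_distance_alt source target allowed_swaps
instance (source : List Int) (target : List Int) (allowed_swaps : List (List Int)) (out : Int) : Decidable (Spec_minimum_hamming_distance source target allowed_swaps out) := by unfold Spec_minimum_hamming_distance; infer_instance

-- ===== CLAIM (what is proved, stated in full; the proofs are below) =====
def Claim_equal_minimum_hamming_distance : Prop := ∀ (source : List Int) (target : List Int) (allowed_swaps : List (List Int)), Dom_minimum_hamming_distance source target allowed_swaps → Pre_minimum_hamming_distance source target allowed_swaps → Spec_minimum_hamming_distance source target allowed_swaps (minimum_hamming_distance source target allowed_swaps)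

-- ===== LEMMAS AND PROOFS =====

-- ---------- generic root theory for parent arrays ----------

def pvStp (p : List Int) (x : Nat) : Nat := (p.getD x 0).toNat

def pvFix (p : List Int) (x : Nat) : Prop := pvStp p x = x

def pvRootsTo (p : List Int) (x r : Nat) : Prop := (∃ m, (pvStp p)^[m] x = r) ∧ pvFix p r

def pvGood (n : Nat) (p : List Int) : Prop :=
  p.length = n ∧ (∀ k, k < n → 0 ≤ p.getD k 0 ∧ p.getD k 0 < n) ∧
    ∀ k, k < n → ∃ r, pvRootsTo p k r

def pvRt (n : Nat) (p : List Int) (x : Nat) : Nat := (pvStp p)^[n] x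

def pvNrm (n : Nat) (x : Int) : Nat := (if x < 0 then x + n else x).toNat

lemma pvFix_iterate {p : List Int} {r : Nat} (h : pvFix p r) (m : Nat) :
    (pvStp p)^[m] r = r := by
  induction m with
  | zero => rfl
  | succ m ih => rw [Function.iterate_succ_apply, h, ih]

lemma pvRootsTo_unique {p : List Int} {x r r' : Nat}
    (h : pvRootsTo p x r) (h' : pvRootsTo p x r') : r = r' := by
  obtain ⟨⟨m, hm⟩, hf⟩ := h
  obtain ⟨⟨m', hm'⟩, hf'⟩ := h'
  rcases le_total m m' with hle | hle
  · have h2 : (pvStp p)^[m'] x = r := by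
      rw [← Nat.sub_add_cancel hle, Function.iterate_add_apply, hm]
      exact pvFix_iterate hf _
    rw [h2] at hm'; exact hm'
  · have h2 : (pvStp p)^[m] x = r' := by
      rw [← Nat.sub_add_cancel hle, Function.iterate_add_apply, hm']
      exact pvFix_iterate hf' _
    rw [hm] at h2; exact h2

lemma pvStp_lt {n : Nat} {p : List Int} (hg : pvGood n p) {x : Nat} (hx : x < n) :
    pvStp p x < n := by
  obtain ⟨-, hb, -⟩ := hg
  have := hb x hx
  unfold pvStp
  omega

lemma pvIter_lt {n : Nat} {p : List Int} (hg : pvGood n p) {x : Nat} (hx : x < n) (m : Nat) :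
    (pvStp p)^[m] x < n := by
  induction m generalizing x with
  | zero => exact hx
  | succ m ih =>
    rw [Function.iterate_succ_apply]
    exact ih (pvStp_lt hg hx)

/-- pigeonhole: under `pvGood` every index reaches its root in fewer than `n` steps. -/
lemma pvReaches_small {n : Nat} {p : List Int} (hg : pvGood n p) {x : Nat} (hx : x < n) :
    ∃ m, m + 1 ≤ n ∧ pvFix p ((pvStp p)^[m] x) := by
  obtain ⟨r, ⟨m0, hm0⟩, hf0⟩ := hg.2.2 x hx
  have hP : ∃ m, pvFix p ((pvStp p)^[m] x) := ⟨m0, by rw [hm0]; exact hf0⟩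
  classical
  let m := Nat.find hP
  have hfix : pvFix p ((pvStp p)^[m] x) := Nat.find_spec hP
  refine ⟨m, ?_, hfix⟩
  -- j ↦ iterate j x is injective on [0, m]
  have hinj : ∀ i j, i < j → j ≤ m → (pvStp p)^[i] x ≠ (pvStp p)^[j] x := by
    intro i j hij hjm heq
    have : pvFix p ((pvStp p)^[m - j + i] x) := by
      have h1 : (pvStp p)^[m - j] ((pvStp p)^[j] x) = (pvStp p)^[m] x := by
        rw [← Function.iterate_add_apply, Nat.sub_add_cancel hjm]
      have h2 : (pvStp p)^[m - j] ((pvStp p)^[i] x) = (pvStp p)^[m - j + i] x := by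
        rw [← Function.iterate_add_apply]
      rw [← heq, h2] at h1
      rw [h1]; exact hfix
    have := Nat.find_le (h := hP) this
    omega
  have hcard : ∀ f : Fin (m + 1) → Fin n, Function.Injective f → m + 1 ≤ n := by
    intro f hf
    simpa using Fintype.card_le_of_injective f hf
  refine hcard (fun j => ⟨(pvStp p)^[j.1] x, pvIter_lt hg hx j.1⟩) ?_
  intro i j hij
  simp only [Fin.mk.injEq] at hij
  by_contra hne
  rcases Nat.lt_or_ge i.1 j.1 with h | h
  · exact hinj i.1 j.1 h (Nat.lt_succ_iff.mp j.2) hij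
  · have : j.1 < i.1 := by
      rcases Nat.lt_or_ge j.1 i.1 with h2 | h2
      · exact h2
      · exact absurd (Fin.ext (Nat.le_antisymm h2 h)) hne
    exact hinj j.1 i.1 this (Nat.lt_succ_iff.mp i.2) hij.symm

lemma pvRt_spec {n : Nat} {p : List Int} (hg : pvGood n p) {x : Nat} (hx : x < n) :
    pvRootsTo p x (pvRt n p x) := by
  obtain ⟨m, hm, hfix⟩ := pvReaches_small hg hx
  have : pvRt n p x = (pvStp p)^[m] x := by
    unfold pvRt
    have : (pvStp p)^[n - m] ((pvStp p)^[m] x) = (pvStp p)^[m] x := pvFix_iterate hfix _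
    rw [← Function.iterate_add_apply, Nat.sub_add_cancel (by omega)] at this
    exact this
  rw [this]
  exact ⟨⟨m, rfl⟩, hfix⟩

lemma pvRt_eq_of_rootsTo {n : Nat} {p : List Int} (hg : pvGood n p) {x r : Nat}
    (hx : x < n) (h : pvRootsTo p x r) : pvRt n p x = r :=
  pvRootsTo_unique (pvRt_spec hg hx) h

lemma pvRt_lt {n : Nat} {p : List Int} (hg : pvGood n p) {x : Nat} (hx : x < n) :
    pvRt n p x < n := pvIter_lt hg hx n

lemma pvRt_fix {n : Nat} {p : List Int} (hg : pvGood n p) {x : Nat} (hx : x < n) :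
    pvFix p (pvRt n p x) := (pvRt_spec hg hx).2

lemma pvRt_of_fix {n : Nat} {p : List Int} (hg : pvGood n p) {x : Nat} (hx : x < n)
    (h : pvFix p x) : pvRt n p x = x :=
  pvRt_eq_of_rootsTo hg hx ⟨⟨0, rfl⟩, h⟩

lemma pvRootsTo_step {p : List Int} {x r : Nat} (h : pvRootsTo p (pvStp p x) r) :
    pvRootsTo p x r := by
  obtain ⟨⟨m, hm⟩, hf⟩ := h
  exact ⟨⟨m + 1, by rw [Function.iterate_succ_apply]; exact hm⟩, hf⟩

lemma pvRt_step {n : Nat} {p : List Int} (hg : pvGood n p) {x : Nat} (hx : x < n) :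
    pvRt n p (pvStp p x) = pvRt n p x := by
  have h1 := pvRt_spec hg (pvStp_lt hg hx)
  exact (pvRt_eq_of_rootsTo hg hx (pvRootsTo_step h1)).symm

lemma pvGetD_set {α : Type} {n : Nat} {p : List α} (hlen : p.length = n) {j : Nat} (v : α)
    {y : Nat} {d : α} (hy : y < n) :
    (p.set j v).getD y d = if y = j then v else p.getD y d := by
  have h1 : (p.set j v).length = n := by simp [hlen]
  rw [List.getD_eq_getElem _ _ (by omega), List.getD_eq_getElem _ _ (by omega),
    List.getElem_set]
  rcases eq_or_ne y j with h | h
  · simp [h]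
  · simp [h, Ne.symm h]

lemma pvStp_set {n : Nat} {p : List Int} (hlen : p.length = n) {j v : Nat}
    (y : Nat) (hy : y < n) :
    pvStp (p.set j (v : Int)) y = if y = j then v else pvStp p y := by
  unfold pvStp
  rw [pvGetD_set hlen _ hy]
  rcases eq_or_ne y j with h | h
  · simp [h]
  · simp [h]

lemma pvRootsTo_step' {p : List Int} {x y r : Nat} (hy : pvStp p x = y)
    (h : pvRootsTo p y r) : pvRootsTo p x r := by
  subst hy; exact pvRootsTo_step h

lemma pvLink_transfer {n : Nat} {p : List Int} {ru rv : Nat} (hg : pvGood n p)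
    (hru : ru < n) (hrv : rv < n) (hfru : pvFix p ru) (hfrv : pvFix p rv) :
    ∀ m x r, x < n → (pvStp p)^[m] x = r → pvFix p r →
      pvRootsTo (p.set ru (rv : Int)) x (if r = ru then rv else r) := by
  have hstp : ∀ y, y < n → pvStp (p.set ru (rv : Int)) y = if y = ru then rv else pvStp p y :=
    fun y hy => pvStp_set hg.1 y hy
  have hfix_rv : pvFix (p.set ru (rv : Int)) rv := by
    unfold pvFix
    rw [hstp rv hrv]
    rcases eq_or_ne rv ru with h | h
    · simp [h]
    · rw [if_neg h]; exact hfrv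
  have hbase : pvRootsTo (p.set ru (rv : Int)) ru rv := by
    refine ⟨⟨1, ?_⟩, hfix_rv⟩
    simp [hstp ru hru]
  intro m
  induction m with
  | zero =>
    intro x r hx hm hf
    simp only [Function.iterate_zero, id] at hm
    subst hm
    rcases eq_or_ne x ru with h | h
    · rw [if_pos h]; rw [h]; exact hbase
    · rw [if_neg h]
      refine ⟨⟨0, rfl⟩, ?_⟩
      unfold pvFix
      rw [hstp x hx, if_neg h]
      exact hf
  | succ m ih =>
    intro x r hx hm hf
    rcases eq_or_ne x ru with h | h
    · subst h
      have : (pvStp p)^[m + 1] x = x := pvFix_iterate hfru (m + 1)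
      rw [this] at hm
      subst hm
      rw [if_pos rfl]
      exact hbase
    · rw [Function.iterate_succ_apply] at hm
      have hy : pvStp p x < n := pvStp_lt hg hx
      have := ih (pvStp p x) r hy hm hf
      exact pvRootsTo_step' (by rw [hstp x hx, if_neg h]) this

lemma pvLink {n : Nat} {p : List Int} {ru rv : Nat} (hg : pvGood n p)
    (hru : ru < n) (hrv : rv < n) (hfru : pvFix p ru) (hfrv : pvFix p rv) :
    pvGood n (p.set ru (rv : Int)) ∧
      ∀ x, x < n → pvRt n (p.set ru (rv : Int)) x
        = if pvRt n p x = ru then rv else pvRt n p x := by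
  have htr := pvLink_transfer hg hru hrv hfru hfrv
  have hroots : ∀ x, x < n →
      pvRootsTo (p.set ru (rv : Int)) x (if pvRt n p x = ru then rv else pvRt n p x) :=
    fun x hx => htr n x (pvRt n p x) hx rfl (pvRt_fix hg hx)
  have hgood : pvGood n (p.set ru (rv : Int)) := by
    refine ⟨by simp [hg.1], ?_, ?_⟩
    · intro k hk
      rw [pvGetD_set hg.1 _ hk]
      rcases eq_or_ne k ru with h | h
      · simp [h]; omega
      · rw [if_neg h]; exact hg.2.1 k hk
    · intro k hk
      exact ⟨_, hroots k hk⟩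
  refine ⟨hgood, fun x hx => ?_⟩
  exact pvRt_eq_of_rootsTo hgood hx (hroots x hx)

lemma pvCompress_transfer {n : Nat} {p : List Int} {j : Nat} (hg : pvGood n p) (hj : j < n) :
    ∀ m x r, x < n → (pvStp p)^[m] x = r → pvFix p r →
      pvRootsTo (p.set j ((pvRt n p j : Nat) : Int)) x r := by
  have hstp : ∀ y, y < n → pvStp (p.set j ((pvRt n p j : Nat) : Int)) y
      = if y = j then pvRt n p j else pvStp p y :=
    fun y hy => pvStp_set hg.1 y hy
  have hfix' : ∀ r, r < n → pvFix p r → pvFix (p.set j ((pvRt n p j : Nat) : Int)) r := by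
    intro r hr hf
    unfold pvFix
    rw [hstp r hr]
    rcases eq_or_ne r j with h | h
    · rw [if_pos h, h]
      exact pvRt_of_fix hg hj (h ▸ hf)
    · rw [if_neg h]; exact hf
  intro m
  induction m with
  | zero =>
    intro x r hx hm hf
    simp only [Function.iterate_zero, id] at hm
    subst hm
    exact ⟨⟨0, rfl⟩, hfix' x hx hf⟩
  | succ m ih =>
    intro x r hx hm hf
    rcases eq_or_ne x j with h | h
    · subst h
      have hrt : r = pvRt n p x :=
        (pvRt_eq_of_rootsTo hg hx ⟨⟨m + 1, hm⟩, hf⟩).symm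
      have hrlt : r < n := by rw [hrt]; exact pvRt_lt hg hx
      refine ⟨⟨1, ?_⟩, hfix' r hrlt hf⟩
      rw [Function.iterate_one, hstp x hx, if_pos rfl, hrt]
    · rw [Function.iterate_succ_apply] at hm
      have hy : pvStp p x < n := pvStp_lt hg hx
      have := ih (pvStp p x) r hy hm hf
      exact pvRootsTo_step' (by rw [hstp x hx, if_neg h]) this

lemma pvCompress {n : Nat} {p : List Int} {j : Nat} (hg : pvGood n p) (hj : j < n) :
    pvGood n (p.set j ((pvRt n p j : Nat) : Int)) ∧
      ∀ x, x < n → pvRt n (p.set j ((pvRt n p j : Nat) : Int)) x = pvRt n p x := by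
  have htr := pvCompress_transfer hg hj
  have hroots : ∀ x, x < n →
      pvRootsTo (p.set j ((pvRt n p j : Nat) : Int)) x (pvRt n p x) :=
    fun x hx => htr n x (pvRt n p x) hx rfl (pvRt_fix hg hx)
  have hgood : pvGood n (p.set j ((pvRt n p j : Nat) : Int)) := by
    refine ⟨by simp [hg.1], ?_, ?_⟩
    · intro k hk
      rw [pvGetD_set hg.1 _ hk]
      rcases eq_or_ne k j with h | h
      · rw [if_pos h]
        have := pvRt_lt hg hj
        constructor <;> omega
      · rw [if_neg h]; exact hg.2.1 k hk
    · intro k hk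
      exact ⟨_, hroots k hk⟩
  refine ⟨hgood, fun x hx => ?_⟩
  exact pvRt_eq_of_rootsTo hgood hx (hroots x hx)

-- ---------- Python index normalisation ----------

lemma pvNrm_lt {n : Nat} {x : Int} (h1 : -(n : Int) ≤ x) (h2 : x < n) : pvNrm n x < n := by
  unfold pvNrm
  split_ifs with h <;> omega

lemma pvNrm_of_nonneg {n : Nat} {x : Int} (h : 0 ≤ x) : pvNrm n x = x.toNat := by
  unfold pvNrm
  rw [if_neg (by omega)]

lemma pvPyIdx {n : Nat} {x : Int} (h1 : -(n : Int) ≤ x) (h2 : x < n) :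
    PySem.List.pyIdx? n x = some (pvNrm n x) := by
  unfold PySem.List.pyIdx? pvNrm
  split_ifs with ha hb hc <;> try omega
  · simp
  · congr 1; omega

lemma pvPyGetD {α : Type} {n : Nat} {p : List α} (hlen : p.length = n) {x : Int} {d : α}
    (h1 : -(n : Int) ≤ x) (h2 : x < n) :
    PySem.List.pyGetD p x d = p.getD (pvNrm n x) d := by
  unfold PySem.List.pyGetD PySem.List.pyGet?
  rw [hlen, pvPyIdx h1 h2]
  simp only [Option.bind_some]
  rw [List.getD_eq_getElem _ _ (by rw [hlen]; exact pvNrm_lt h1 h2)]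
  simp [List.getElem?_eq_getElem (by rw [hlen]; exact pvNrm_lt h1 h2)]

lemma pvPySetD {α : Type} {n : Nat} {p : List α} (hlen : p.length = n) {x : Int} (v : α)
    (h1 : -(n : Int) ≤ x) (h2 : x < n) :
    PySem.List.pySetD p x v = p.set (pvNrm n x) v := by
  unfold PySem.List.pySetD PySem.List.pySet?
  rw [hlen, pvPyIdx h1 h2]
  simp

-- ---------- the find lemma ----------

lemma pvFind_succ (f : Nat) (p : List Int) (x : Int) : pvFind (f+1) p x =
    (if PySem.List.pyGetD p x 0 ≠ x then
       let rp := pvFind f p (PySem.List.pyGetD p x 0)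
       let p2 := PySem.List.pySetD rp.2 x rp.1
       (PySem.List.pyGetD p2 x 0, p2)
     else (PySem.List.pyGetD p x 0, p)) := rfl

lemma pvFind_spec {n : Nat} : ∀ (m : Nat) (p : List Int) (x : Int) (fuel : Nat),
    pvGood n p → -(n : Int) ≤ x → x < n →
    pvFix p ((pvStp p)^[m] (pvNrm n x)) → m + 2 ≤ fuel →
    (pvFind fuel p x).1 = ((pvRt n p (pvNrm n x) : Nat) : Int) ∧
    pvGood n (pvFind fuel p x).2 ∧
    ∀ y, y < n → pvRt n (pvFind fuel p x).2 y = pvRt n p y := by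
  intro m
  induction m with
  | zero =>
    intro p x fuel hg h1 h2 hm hfuel
    obtain ⟨f, rfl⟩ : ∃ f, fuel = f + 1 := ⟨fuel - 1, by omega⟩
    have hnlt : pvNrm n x < n := pvNrm_lt h1 h2
    have hget : PySem.List.pyGetD p x 0 = p.getD (pvNrm n x) 0 := pvPyGetD hg.1 h1 h2
    have hb := hg.2.1 (pvNrm n x) hnlt
    simp only [Function.iterate_zero, id] at hm
    have hfixv : (p.getD (pvNrm n x) 0) = ((pvNrm n x : Nat) : Int) := by
      have : pvStp p (pvNrm n x) = pvNrm n x := hm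
      unfold pvStp at this
      omega
    rcases eq_or_ne (PySem.List.pyGetD p x 0) x with hpe | hpe
    · -- parent[x] == x : return immediately
      rw [pvFind_succ, if_neg (by simp [hpe])]
      have hx0 : x = ((pvNrm n x : Nat) : Int) := by rw [← hfixv, ← hget, hpe]
      refine ⟨?_, hg, fun y _ => rfl⟩
      rw [hpe, pvRt_of_fix hg hnlt hm, ← hx0]
    · -- parent[x] != x but pvNrm n x is already a root (negative alias of the root)
      rw [pvFind_succ, if_pos (by simp [hpe])]
      obtain ⟨f', rfl⟩ : ∃ f', f = f' + 1 := ⟨f - 1, by omega⟩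
      have hpx' : PySem.List.pyGetD p (PySem.List.pyGetD p x 0) 0
          = PySem.List.pyGetD p x 0 := by
        rw [hget, hfixv,
          pvPyGetD hg.1 (by omega) (by exact_mod_cast hnlt),
          pvNrm_of_nonneg (by omega)]
        simp only [Int.toNat_natCast]
        rw [hfixv]
      have hinner : pvFind (f' + 1) p (PySem.List.pyGetD p x 0)
          = (PySem.List.pyGetD p x 0, p) := by
        rw [pvFind_succ, if_neg (by simp [hpx']), hpx']
      simp only [hinner]
      have hrt : pvRt n p (pvNrm n x) = pvNrm n x := pvRt_of_fix hg hnlt hm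
      have hset : PySem.List.pySetD p x (PySem.List.pyGetD p x 0)
          = p.set (pvNrm n x) ((pvRt n p (pvNrm n x) : Nat) : Int) := by
        rw [pvPySetD hg.1 _ h1 h2, hget, hfixv, hrt]
      rw [hset]
      obtain ⟨hgood2, hpres⟩ := pvCompress hg hnlt
      refine ⟨?_, hgood2, fun y hy => hpres y hy⟩
      rw [pvPyGetD hgood2.1 h1 h2, pvGetD_set hg.1 _ hnlt, if_pos rfl]
  | succ m ih =>
    intro p x fuel hg h1 h2 hm hfuel
    obtain ⟨f, rfl⟩ : ∃ f, fuel = f + 1 := ⟨fuel - 1, by omega⟩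
    have hnlt : pvNrm n x < n := pvNrm_lt h1 h2
    have hget : PySem.List.pyGetD p x 0 = p.getD (pvNrm n x) 0 := pvPyGetD hg.1 h1 h2
    have hb := hg.2.1 (pvNrm n x) hnlt
    rcases eq_or_ne (PySem.List.pyGetD p x 0) x with hpe | hpe
    · -- parent[x] == x : root already
      rw [pvFind_succ, if_neg (by simp [hpe])]
      have hx0 : 0 ≤ x := by rw [← hpe, hget]; exact hb.1
      have hfix : pvFix p (pvNrm n x) := by
        unfold pvFix pvStp
        rw [← hget, hpe, pvNrm_of_nonneg hx0]
      refine ⟨?_, hg, fun y _ => rfl⟩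
      rw [hpe, pvRt_of_fix hg hnlt hfix, pvNrm_of_nonneg hx0]
      omega
    · rw [pvFind_succ, if_pos (by simp [hpe])]
      -- recursive call on px := parent[x]
      have hpx1 : -(n : Int) ≤ PySem.List.pyGetD p x 0 := by rw [hget]; omega
      have hpx2 : PySem.List.pyGetD p x 0 < n := by rw [hget]; omega
      have hnrm_px : pvNrm n (PySem.List.pyGetD p x 0) = pvStp p (pvNrm n x) := by
        rw [hget, pvNrm_of_nonneg hb.1]
        rfl
      have hm' : pvFix p ((pvStp p)^[m] (pvNrm n (PySem.List.pyGetD p x 0))) := by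
        rw [hnrm_px, ← Function.iterate_succ_apply]
        exact hm
      obtain ⟨hv, hgood1, hpres1⟩ :=
        ih p (PySem.List.pyGetD p x 0) f hg hpx1 hpx2 hm' (by omega)
      have hrtpx : pvRt n p (pvNrm n (PySem.List.pyGetD p x 0)) = pvRt n p (pvNrm n x) := by
        rw [hnrm_px, pvRt_step hg hnlt]
      have hv' : (pvFind f p (PySem.List.pyGetD p x 0)).1
          = ((pvRt n (pvFind f p (PySem.List.pyGetD p x 0)).2 (pvNrm n x) : Nat) : Int) := by
        rw [hv, hrtpx, hpres1 _ hnlt]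
      have hset : PySem.List.pySetD (pvFind f p (PySem.List.pyGetD p x 0)).2 x
            (pvFind f p (PySem.List.pyGetD p x 0)).1
          = (pvFind f p (PySem.List.pyGetD p x 0)).2.set (pvNrm n x)
            ((pvRt n (pvFind f p (PySem.List.pyGetD p x 0)).2 (pvNrm n x) : Nat) : Int) := by
        rw [pvPySetD hgood1.1 _ h1 h2, hv']
      simp only [hset]
      obtain ⟨hgood2, hpres2⟩ := pvCompress hgood1 hnlt
      refine ⟨?_, hgood2, fun y hy => by rw [hpres2 y hy, hpres1 y hy]⟩
      rw [pvPyGetD hgood2.1 h1 h2, pvGetD_set hgood1.1 _ hnlt, if_pos rfl,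
        hpres1 _ hnlt]

lemma pvFind_full {n : Nat} {p : List Int} {x : Int} {fuel : Nat}
    (hg : pvGood n p) (h1 : -(n : Int) ≤ x) (h2 : x < n) (hf : n + 1 ≤ fuel) :
    (pvFind fuel p x).1 = ((pvRt n p (pvNrm n x) : Nat) : Int) ∧
    pvGood n (pvFind fuel p x).2 ∧
    ∀ y, y < n → pvRt n (pvFind fuel p x).2 y = pvRt n p y := by
  obtain ⟨m, hmn, hfix⟩ := pvReaches_small hg (pvNrm_lt h1 h2)
  exact pvFind_spec m p x fuel hg h1 h2 hfix (by omega)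

lemma pvUnion_spec {n : Nat} {p : List Int} {u v : Int} (hg : pvGood n p)
    (hu1 : -(n : Int) ≤ u) (hu2 : u < n) (hv1 : -(n : Int) ≤ v) (hv2 : v < n) :
    pvGood n (pvUnion p u v) ∧ ∀ x, x < n → pvRt n (pvUnion p u v) x =
      (if pvRt n p x = pvRt n p (pvNrm n u) then pvRt n p (pvNrm n v) else pvRt n p x) := by
  have hfuel1 : n + 1 ≤ p.length + 1 := by rw [hg.1]
  obtain ⟨hval1, hg1, hp1⟩ := pvFind_full hg hu1 hu2 hfuel1
  set r1 := pvFind (p.length + 1) p u with hr1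
  have hfuel2 : n + 1 ≤ r1.2.length + 1 := by rw [hg1.1]
  obtain ⟨hval2, hg2, hp2⟩ := pvFind_full hg1 hv1 hv2 hfuel2
  set r2 := pvFind (r1.2.length + 1) r1.2 v with hr2
  set ru := pvRt n p (pvNrm n u) with hru
  set rv := pvRt n p (pvNrm n v) with hrv
  have hrulr : ru < n := pvRt_lt hg (pvNrm_lt hu1 hu2)
  have hrvlr : rv < n := pvRt_lt hg (pvNrm_lt hv1 hv2)
  have hval2' : r2.1 = ((rv : Nat) : Int) := by
    rw [hval2, hp1 _ (pvNrm_lt hv1 hv2)]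
  have hunfold : pvUnion p u v = if r1.1 ≠ r2.1 then PySem.List.pySetD r2.2 r1.1 r2.1 else r2.2 := by
    rw [pvUnion, ← hr1, ← hr2]
  have hfixp_ru : pvFix p ru := pvRt_fix hg (pvNrm_lt hu1 hu2)
  have hfixp_rv : pvFix p rv := pvRt_fix hg (pvNrm_lt hv1 hv2)
  have hrt2 : ∀ y, y < n → pvRt n r2.2 y = pvRt n p y := by
    intro y hy; rw [hp2 y hy, hp1 y hy]
  rcases eq_or_ne ru rv with heq | hne
  · rw [hunfold, if_neg (by rw [hval1, hval2', heq]; simp)]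
    refine ⟨hg2, fun x hx => ?_⟩
    rw [hrt2 x hx]
    split_ifs with h
    · rw [h, heq]
    · rfl
  · rw [hunfold, if_pos (by rw [hval1, hval2']; simp; omega)]
    have hset : PySem.List.pySetD r2.2 r1.1 r2.1 = r2.2.set ru ((rv : Nat) : Int) := by
      rw [hval1, hval2', pvPySetD hg2.1 _ (by omega) (by exact_mod_cast hrulr),
        pvNrm_of_nonneg (by omega)]
      simp
    rw [hset]
    have hfix2_ru : pvFix r2.2 ru := by
      have h1' : pvRt n r2.2 ru = ru := by
        rw [hrt2 _ hrulr]; exact pvRt_of_fix hg hrulr hfixp_ru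
      have := pvRt_fix hg2 hrulr
      rw [h1'] at this; exact this
    have hfix2_rv : pvFix r2.2 rv := by
      have h1' : pvRt n r2.2 rv = rv := by
        rw [hrt2 _ hrvlr]; exact pvRt_of_fix hg hrvlr hfixp_rv
      have := pvRt_fix hg2 hrvlr
      rw [h1'] at this; exact this
    obtain ⟨hgood3, hform⟩ := pvLink hg2 hrulr hrvlr hfix2_ru hfix2_rv
    refine ⟨hgood3, fun x hx => ?_⟩
    rw [hform x hx, hrt2 x hx]

-- ---------- the pure relabelling model shared by both kernel proofs ----------

def pvMStep (g : Nat → Nat) (e : Nat × Nat) : Nat → Nat :=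
  fun k => if g k = g e.1 then g e.2 else g k

def pvEdgesOf (n : Nat) (es : List (List Int)) : List (Nat × Nat) :=
  es.filterMap (fun e => match e with
    | [u, v] => some (pvNrm n u, pvNrm n v)
    | _ => none)

-- "i and j are in the same connected component of the swap graph"
def pvConn (n : Nat) (es : List (List Int)) (i j : Nat) : Prop :=
  (pvEdgesOf n es).foldl pvMStep id i = (pvEdgesOf n es).foldl pvMStep id j

lemma pvConn_refl (n : Nat) (es : List (List Int)) (i : Nat) : pvConn n es i i := rfl

lemma pvConn_symm {n : Nat} {es : List (List Int)} {i j : Nat}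
    (h : pvConn n es i j) : pvConn n es j i := h.symm

lemma pvConn_trans {n : Nat} {es : List (List Int)} {i j k : Nat}
    (h1 : pvConn n es i j) (h2 : pvConn n es j k) : pvConn n es i k := h1.trans h2

lemma pvFold_pres (E : List (Nat × Nat)) : ∀ (g : Nat → Nat) {a b : Nat}, g a = g b →
    E.foldl pvMStep g a = E.foldl pvMStep g b := by
  induction E with
  | nil => intro g a b h; exact h
  | cons e t ih =>
    intro g a b h
    simp only [List.foldl_cons]
    exact ih (pvMStep g e) (by unfold pvMStep; rw [h])

lemma pvLbl_join (E : List (Nat × Nat)) : ∀ (g : Nat → Nat), ∀ pr ∈ E,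
    E.foldl pvMStep g pr.1 = E.foldl pvMStep g pr.2 := by
  induction E with
  | nil => intro g pr h; exact absurd h (List.not_mem_nil)
  | cons e t ih =>
    intro g pr hpr
    simp only [List.foldl_cons]
    rcases List.mem_cons.mp hpr with rfl | hpr'
    · apply pvFold_pres
      unfold pvMStep
      simp
    · exact ih (pvMStep g e) pr hpr'

lemma pvLbl_min (E : List (Nat × Nat)) : ∀ (g : Nat → Nat) (S : Nat → Prop),
    (∀ pr ∈ E, (S pr.1 ↔ S pr.2)) → (∀ i j, g i = g j → (S i ↔ S j)) →
    ∀ i j, E.foldl pvMStep g i = E.foldl pvMStep g j → (S i ↔ S j) := by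
  induction E with
  | nil => intro g S _ hg i j h; exact hg i j h
  | cons e t ih =>
    intro g S hE hg i j h
    simp only [List.foldl_cons] at h
    refine ih (pvMStep g e) S (fun pr hpr => hE pr (List.mem_cons_of_mem _ hpr)) ?_ i j h
    intro a b hab
    have hedge : S e.1 ↔ S e.2 := hE e List.mem_cons_self
    unfold pvMStep at hab
    by_cases h1 : g a = g e.1 <;> by_cases h2 : g b = g e.1
    · exact (hg a e.1 h1).trans (hg b e.1 h2).symm
    · rw [if_pos h1, if_neg h2] at hab
      exact ((hg a e.1 h1).trans hedge).trans (hg e.2 b hab)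
    · rw [if_neg h1, if_pos h2] at hab
      exact ((hg a e.2 hab).trans hedge.symm).trans (hg e.1 b h2.symm)
    · rw [if_neg h1, if_neg h2] at hab
      exact hg a b hab

-- ---------- relabelling kernels ----------

lemma pvRelabelKer {β : Type} [DecidableEq β] (g g' : Nat → β) (a b : β) (n : Nat)
    (hform : ∀ k, k < n → g' k = if g k = b then a else g k) {i j : Nat}
    (hi : i < n) (hj : j < n) :
    (g' i = g' j ↔ (g i = g j ∨ (g i = a ∧ g j = b) ∨ (g i = b ∧ g j = a))) := by
  rw [hform i hi, hform j hj]
  by_cases h1 : g i = b <;> by_cases h2 : g j = b <;>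
    simp [h1, h2, eq_comm] <;> tauto

-- A's kernel after the union loop equals the model kernel
set_option maxHeartbeats 1600000 in
lemma pvFoldA {n : Nat} : ∀ (es : List (List Int)) (p : List Int) (g : Nat → Nat),
    (∀ e ∈ es, e.length = 2 ∧ ∀ x ∈ e, -(n : Int) ≤ x ∧ x < (n : Int)) →
    pvGood n p →
    (∀ i j, i < n → j < n → (pvRt n p i = pvRt n p j ↔ g i = g j)) →
    pvGood n (es.foldl pvAStepF p) ∧
    ∀ i j, i < n → j < n →
      (pvRt n (es.foldl pvAStepF p) i = pvRt n (es.foldl pvAStepF p) j ↔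
        (pvEdgesOf n es).foldl pvMStep g i = (pvEdgesOf n es).foldl pvMStep g j) := by
  intro es
  induction es with
  | nil => exact fun p g _ hg hker => ⟨hg, hker⟩
  | cons e t ih =>
    intro p g hes hg hker
    obtain ⟨hlen2, hrange⟩ := hes e List.mem_cons_self
    obtain ⟨u, v, rfl⟩ : ∃ u v : Int, e = [u, v] := by
      match e, hlen2 with
      | [u, v], _ => exact ⟨u, v, rfl⟩
    obtain ⟨hu1, hu2⟩ := hrange u (by simp)
    obtain ⟨hv1, hv2⟩ := hrange v (by simp)
    have hE : pvEdgesOf n ([u, v] :: t) = (pvNrm n u, pvNrm n v) :: pvEdgesOf n t := rfl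
    simp only [List.foldl_cons, hE]
    obtain ⟨hg', hformA⟩ := pvUnion_spec hg hu1 hu2 hv1 hv2
    have hnu : pvNrm n u < n := pvNrm_lt hu1 hu2
    have hnv : pvNrm n v < n := pvNrm_lt hv1 hv2
    have hker' : ∀ i j, i < n → j < n →
        (pvRt n (pvUnion p u v) i = pvRt n (pvUnion p u v) j ↔
          pvMStep g (pvNrm n u, pvNrm n v) i = pvMStep g (pvNrm n u, pvNrm n v) j) := by
      intro i j hi hj
      rw [pvRelabelKer (pvRt n p) (pvRt n (pvUnion p u v))
        (pvRt n p (pvNrm n v)) (pvRt n p (pvNrm n u)) n (fun k hk => hformA k hk) hi hj]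
      rw [pvRelabelKer g (pvMStep g (pvNrm n u, pvNrm n v))
        (g (pvNrm n v)) (g (pvNrm n u)) n (fun k _ => rfl) hi hj]
      have t1 := hker i j hi hj
      have t2 := hker i (pvNrm n u) hi hnu
      have t3 := hker j (pvNrm n u) hj hnu
      have t4 := hker i (pvNrm n v) hi hnv
      have t5 := hker j (pvNrm n v) hj hnv
      tauto
    have hshow : pvAStepF p [u, v] = pvUnion p u v := rfl
    rw [hshow]
    exact ih (pvUnion p u v) (pvMStep g (pvNrm n u, pvNrm n v))
      (fun e' he' => hes e' (List.mem_cons_of_mem _ he')) hg' hker'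

-- ---------- adjacency list construction ----------

def pvAdjOk (n : Nat) (E : List (Nat × Nat)) (adj : List (List Int)) : Prop :=
  adj.length = n ∧
  (∀ k, k < n → ∀ y ∈ adj.getD k [], (-(n : Int) ≤ y ∧ y < (n : Int)) ∧
      ((k, pvNrm n y) ∈ E ∨ (pvNrm n y, k) ∈ E)) ∧
  (∀ pr ∈ E, pr.1 < n ∧ pr.2 < n ∧
      (∃ y ∈ adj.getD pr.1 [], pvNrm n y = pr.2) ∧ (∃ y ∈ adj.getD pr.2 [], pvNrm n y = pr.1))

lemma pvAdjStep_ok {n : Nat} {E : List (Nat × Nat)} {adj : List (List Int)} {u v : Int}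
    (hok : pvAdjOk n E adj)
    (hu1 : -(n : Int) ≤ u) (hu2 : u < n) (hv1 : -(n : Int) ≤ v) (hv2 : v < n) :
    pvAdjOk n (E ++ [(pvNrm n u, pvNrm n v)]) (pvAdjStep adj [u, v]) := by
  obtain ⟨hlen, hsound, hcompl⟩ := hok
  have hnu : pvNrm n u < n := pvNrm_lt hu1 hu2
  have hnv : pvNrm n v < n := pvNrm_lt hv1 hv2
  have hstep : pvAdjStep adj [u, v]
      = (adj.set (pvNrm n u) (adj.getD (pvNrm n u) [] ++ [v])).set (pvNrm n v)
          ((adj.set (pvNrm n u) (adj.getD (pvNrm n u) [] ++ [v])).getD (pvNrm n v) [] ++ [u]) := by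
    show (PySem.List.pySetD (PySem.List.pySetD adj u (PySem.List.pyGetD adj u [] ++ [v])) v
        (PySem.List.pyGetD (PySem.List.pySetD adj u (PySem.List.pyGetD adj u [] ++ [v])) v [] ++ [u])) = _
    rw [pvPyGetD hlen hu1 hu2, pvPySetD hlen _ hu1 hu2]
    have hlen1 : (adj.set (pvNrm n u) (adj.getD (pvNrm n u) [] ++ [v])).length = n := by
      simp [hlen]
    rw [pvPyGetD hlen1 hv1 hv2, pvPySetD hlen1 _ hv1 hv2]
  set adj1 := adj.set (pvNrm n u) (adj.getD (pvNrm n u) [] ++ [v]) with hadj1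
  have hlen1 : adj1.length = n := by simp [hadj1, hlen]
  set adj2 := adj1.set (pvNrm n v) (adj1.getD (pvNrm n v) [] ++ [u]) with hadj2
  have hlen2 : adj2.length = n := by simp [hadj2, hlen1]
  have hget1 : ∀ k, k < n → adj1.getD k []
      = if k = pvNrm n u then adj.getD k [] ++ [v] else adj.getD k [] := by
    intro k hk
    rw [hadj1, pvGetD_set hlen _ hk]
    rcases eq_or_ne k (pvNrm n u) with h | h
    · rw [if_pos h, if_pos h, h]
    · rw [if_neg h, if_neg h]
  have hget2 : ∀ k, k < n → adj2.getD k []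
      = if k = pvNrm n v then adj1.getD k [] ++ [u] else adj1.getD k [] := by
    intro k hk
    rw [hadj2, pvGetD_set hlen1 _ hk]
    rcases eq_or_ne k (pvNrm n v) with h | h
    · rw [if_pos h, if_pos h, h]
    · rw [if_neg h, if_neg h]
  rw [hstep]
  refine ⟨hlen2, ?_, ?_⟩
  · -- soundness
    intro k hk y hy
    rw [hget2 k hk] at hy
    have hcase : y ∈ adj.getD k [] ∨ (y = v ∧ k = pvNrm n u) ∨ (y = u ∧ k = pvNrm n v) := by
      rw [hget1 k hk] at hy
      split_ifs at hy with h1 h2 h3 <;>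
        (try simp only [List.mem_append, List.mem_singleton] at hy) <;> tauto
    rcases hcase with h | ⟨rfl, rfl⟩ | ⟨rfl, rfl⟩
    · obtain ⟨hr, he⟩ := hsound k hk y h
      refine ⟨hr, ?_⟩
      rcases he with he | he
      · exact Or.inl (List.mem_append_left _ he)
      · exact Or.inr (List.mem_append_left _ he)
    · exact ⟨⟨hv1, hv2⟩, Or.inl (by simp)⟩
    · exact ⟨⟨hu1, hu2⟩, Or.inr (by simp)⟩
  · -- completeness
    intro pr hpr
    rcases List.mem_append.mp hpr with hold | hnew
    · obtain ⟨h1, h2, ⟨y1, hy1, hn1⟩, ⟨y2, hy2, hn2⟩⟩ := hcompl pr hold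
      refine ⟨h1, h2, ⟨y1, ?_, hn1⟩, ⟨y2, ?_, hn2⟩⟩
      · rw [hget2 pr.1 h1, hget1 pr.1 h1]
        split_ifs <;> (try simp only [List.mem_append, List.mem_singleton]) <;>
          first | tauto | simp_all
      · rw [hget2 pr.2 h2, hget1 pr.2 h2]
        split_ifs <;> (try simp only [List.mem_append, List.mem_singleton]) <;>
          first | tauto | simp_all
    · have hpr' : pr = (pvNrm n u, pvNrm n v) := by simpa using hnew
      subst hpr'
      refine ⟨hnu, hnv, ⟨v, ?_, rfl⟩, ⟨u, ?_, rfl⟩⟩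
      · rw [hget2 _ hnu, hget1 _ hnu]
        split_ifs <;> (try simp only [List.mem_append, List.mem_singleton]) <;>
          first | tauto | simp_all
      · rw [hget2 _ hnv, hget1 _ hnv, if_pos rfl]
        split_ifs <;> (try simp only [List.mem_append, List.mem_singleton]) <;>
          first | tauto | simp_all
  
lemma pvAdjBuild {n : Nat} : ∀ (es : List (List Int)) (adj : List (List Int)) (E0 : List (Nat × Nat)),
    (∀ e ∈ es, e.length = 2 ∧ ∀ x ∈ e, -(n : Int) ≤ x ∧ x < (n : Int)) →
    pvAdjOk n E0 adj →
    pvAdjOk n (E0 ++ pvEdgesOf n es) (es.foldl pvAdjStep adj) := by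
  intro es
  induction es with
  | nil => intro adj E0 _ hok; simpa [pvEdgesOf] using hok
  | cons e t ih =>
    intro adj E0 hes hok
    obtain ⟨hlen2, hrange⟩ := hes e List.mem_cons_self
    obtain ⟨u, v, rfl⟩ : ∃ u v : Int, e = [u, v] := by
      match e, hlen2 with
      | [u, v], _ => exact ⟨u, v, rfl⟩
    obtain ⟨hu1, hu2⟩ := hrange u (by simp)
    obtain ⟨hv1, hv2⟩ := hrange v (by simp)
    have hE : pvEdgesOf n ([u, v] :: t) = (pvNrm n u, pvNrm n v) :: pvEdgesOf n t := rfl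
    simp only [List.foldl_cons, hE]
    have := ih (pvAdjStep adj [u, v]) (E0 ++ [(pvNrm n u, pvNrm n v)])
      (fun e' he' => hes e' (List.mem_cons_of_mem _ he'))
      (pvAdjStep_ok hok hu1 hu2 hv1 hv2)
    simpa using this

lemma pvAdjOk_replicate (n : Nat) : pvAdjOk n [] (List.replicate n ([] : List Int)) := by
  refine ⟨by simp, ?_, ?_⟩
  · intro k hk y hy
    rw [List.getD_eq_getElem _ _ (by simpa using hk)] at hy
    simp at hy
  · intro pr hpr
    exact absurd hpr (List.not_mem_nil)

-- ---------- the DFS labelling ----------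

def pvUnl (n : Nat) (cid : List Int) : Nat :=
  ((Finset.range n).filter (fun k => cid.getD k (-1) = -1)).card

lemma pvUnl_le (n : Nat) (cid : List Int) : pvUnl n cid ≤ n := by
  unfold pvUnl
  calc ((Finset.range n).filter (fun k => cid.getD k (-1) = -1)).card
      ≤ (Finset.range n).card := Finset.card_filter_le _ _
    _ = n := Finset.card_range n

lemma pvDfs_succ (adj : List (List Int)) (c : Int) (fuel : Nat) (cid stack : List Int) :
    pvDfs adj c (fuel + 1) cid stack
      = match PySem.List.pop? stack with
        | none => cid
        | some (x, rest) =>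
          pvDfs adj c fuel
            (((PySem.List.pyGetD adj x []).foldl (pvDfsVisit c) (cid, rest)).1)
            (((PySem.List.pyGetD adj x []).foldl (pvDfsVisit c) (cid, rest)).2) := rfl

lemma pvUnl_set {n : Nat} {cid : List Int} {j : Nat} {c : Int} (hlen : cid.length = n)
    (hj : j < n) (hcid : cid.getD j (-1) = -1) (hc : c ≠ -1) :
    pvUnl n (cid.set j c) + 1 = pvUnl n cid := by
  unfold pvUnl
  have hfe : (Finset.range n).filter (fun k => (cid.set j c).getD k (-1) = -1)
      = ((Finset.range n).filter (fun k => cid.getD k (-1) = -1)).erase j := by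
    apply Finset.ext
    intro k
    simp only [Finset.mem_erase, Finset.mem_filter, Finset.mem_range]
    constructor
    · rintro ⟨hk, hv⟩
      rw [pvGetD_set hlen _ hk] at hv
      rcases eq_or_ne k j with h | h
      · rw [if_pos h] at hv; exact absurd hv hc
      · rw [if_neg h] at hv
        exact ⟨h, hk, hv⟩
    · rintro ⟨h, hk, hv⟩
      refine ⟨hk, ?_⟩
      rw [pvGetD_set hlen _ hk, if_neg h]
      exact hv
  rw [hfe]
  have hmem : j ∈ (Finset.range n).filter (fun k => cid.getD k (-1) = -1) :=
    Finset.mem_filter.mpr ⟨Finset.mem_range.mpr hj, hcid⟩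
  rw [Finset.card_erase_of_mem hmem]
  have : 0 < ((Finset.range n).filter (fun k => cid.getD k (-1) = -1)).card :=
    Finset.card_pos.mpr ⟨j, hmem⟩
  omega

-- the inner "for y in adj[x]" loop
lemma pvVisitFold {n : Nat} {c : Int} (hc : c ≠ -1) :
    ∀ (ys : List Int) (cid : List Int) (st : List Int),
    cid.length = n → (∀ y ∈ ys, -(n : Int) ≤ y ∧ y < (n : Int)) →
    (ys.foldl (pvDfsVisit c) (cid, st)).1.length = n ∧
    (∀ k, k < n → (ys.foldl (pvDfsVisit c) (cid, st)).1.getD k (-1)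
        = if cid.getD k (-1) = -1 ∧ (∃ y ∈ ys, pvNrm n y = k) then c else cid.getD k (-1)) ∧
    ∃ new, (ys.foldl (pvDfsVisit c) (cid, st)).2 = st ++ new ∧
      (∀ y ∈ new, (-(n : Int) ≤ y ∧ y < (n : Int)) ∧ cid.getD (pvNrm n y) (-1) = -1 ∧
        (∃ y' ∈ ys, pvNrm n y' = pvNrm n y)) ∧
      (∀ k, k < n → cid.getD k (-1) = -1 → (∃ y ∈ ys, pvNrm n y = k) →
        ∃ y ∈ new, pvNrm n y = k) ∧
      pvUnl n (ys.foldl (pvDfsVisit c) (cid, st)).1 + new.length = pvUnl n cid := by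
  intro ys
  induction ys with
  | nil =>
    intro cid st hlen _
    refine ⟨hlen, fun k hk => by simp, [], by simp, by simp, ?_, by simp⟩
    intro k _ _ h
    obtain ⟨y, hy, -⟩ := h
    exact absurd hy (List.not_mem_nil)
  | cons y t ih =>
    intro cid st hlen hys
    obtain ⟨hy1, hy2⟩ := hys y List.mem_cons_self
    have hny : pvNrm n y < n := pvNrm_lt hy1 hy2
    have hget : PySem.List.pyGetD cid y (-1) = cid.getD (pvNrm n y) (-1) :=
      pvPyGetD hlen hy1 hy2
    simp only [List.foldl_cons]
    by_cases hseen : cid.getD (pvNrm n y) (-1) = -1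
    · -- newly labelled, pushed
      have hstep : pvDfsVisit c (cid, st) y = (cid.set (pvNrm n y) c, st ++ [y]) := by
        simp only [pvDfsVisit]
        rw [if_pos (by rw [hget]; exact hseen), pvPySetD hlen _ hy1 hy2]
      rw [hstep]
      set cid1 := cid.set (pvNrm n y) c with hcid1
      have hlen1 : cid1.length = n := by simp [hcid1, hlen]
      obtain ⟨rlen, rget, new, rst, rnew, rcompl, rcnt⟩ :=
        ih cid1 (st ++ [y]) hlen1 (fun z hz => hys z (List.mem_cons_of_mem _ hz))
      have hget1 : ∀ k, k < n → cid1.getD k (-1)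
          = if k = pvNrm n y then c else cid.getD k (-1) := by
        intro k hk
        rw [hcid1, pvGetD_set hlen _ hk]
      refine ⟨rlen, ?_, y :: new, by rw [rst]; simp, ?_, ?_, ?_⟩
      · intro k hk
        rw [rget k hk, hget1 k hk]
        rcases eq_or_ne k (pvNrm n y) with rfl | hne
        · rw [if_pos rfl, if_neg (fun h => hc h.1),
            if_pos ⟨hseen, ⟨y, List.mem_cons_self, rfl⟩⟩]
        · rw [if_neg hne]
          have hcongr : (cid.getD k (-1) = -1 ∧ ∃ y' ∈ t, pvNrm n y' = k) ↔
              (cid.getD k (-1) = -1 ∧ ∃ y' ∈ y :: t, pvNrm n y' = k) := by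
            constructor
            · rintro ⟨h1, z, hz, he⟩
              exact ⟨h1, z, List.mem_cons_of_mem _ hz, he⟩
            · rintro ⟨h1, z, hz, he⟩
              rcases List.mem_cons.mp hz with rfl | hz'
              · exact absurd he.symm hne
              · exact ⟨h1, z, hz', he⟩
          rw [if_congr hcongr rfl rfl]
      · intro z hz
        rcases List.mem_cons.mp hz with rfl | hz'
        · exact ⟨⟨hy1, hy2⟩, hseen, ⟨z, List.mem_cons_self, rfl⟩⟩
        · obtain ⟨hr, hu, y', hy', he⟩ := rnew z hz'
          have : cid.getD (pvNrm n z) (-1) = -1 := by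
            rw [hget1 _ (pvNrm_lt hr.1 hr.2)] at hu
            split_ifs at hu with h
            · exact absurd hu hc
            · exact hu
          exact ⟨hr, this, ⟨y', List.mem_cons_of_mem _ hy', he⟩⟩
      · intro k hk hkv hex
        obtain ⟨z, hz, hez⟩ := hex
        rcases List.mem_cons.mp hz with rfl | hz'
        · exact ⟨z, List.mem_cons_self, hez⟩
        · rcases eq_or_ne k (pvNrm n y) with rfl | hne
          · exact ⟨y, List.mem_cons_self, rfl⟩
          · have hkv1 : cid1.getD k (-1) = -1 := by
              rw [hget1 k hk, if_neg hne]; exact hkv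
            obtain ⟨w, hw, hew⟩ := rcompl k hk hkv1 ⟨z, hz', hez⟩
            exact ⟨w, List.mem_cons_of_mem _ hw, hew⟩
      · have h1 : pvUnl n cid1 + 1 = pvUnl n cid := by
          rw [hcid1]
          exact pvUnl_set hlen hny hseen hc
        simp only [List.length_cons]
        omega
    · -- already labelled, skipped
      have hstep : pvDfsVisit c (cid, st) y = (cid, st) := by
        simp only [pvDfsVisit]
        rw [if_neg (by rw [hget]; exact hseen)]
      rw [hstep]
      obtain ⟨rlen, rget, new, rst, rnew, rcompl, rcnt⟩ :=
        ih cid st hlen (fun z hz => hys z (List.mem_cons_of_mem _ hz))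
      refine ⟨rlen, ?_, new, rst, ?_, ?_, rcnt⟩
      · intro k hk
        rw [rget k hk]
        rcases eq_or_ne k (pvNrm n y) with rfl | hne
        · rw [if_neg (fun h => hseen h.1), if_neg (fun h => hseen h.1)]
        · have hcongr : (cid.getD k (-1) = -1 ∧ ∃ y' ∈ t, pvNrm n y' = k) ↔
              (cid.getD k (-1) = -1 ∧ ∃ y' ∈ y :: t, pvNrm n y' = k) := by
            constructor
            · rintro ⟨h1, z, hz, he⟩
              exact ⟨h1, z, List.mem_cons_of_mem _ hz, he⟩
            · rintro ⟨h1, z, hz, he⟩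
              rcases List.mem_cons.mp hz with rfl | hz'
              · exact absurd he.symm hne
              · exact ⟨h1, z, hz', he⟩
          rw [if_congr hcongr rfl rfl]
      · intro z hz
        obtain ⟨hr, hu, y', hy', he⟩ := rnew z hz
        exact ⟨hr, hu, ⟨y', List.mem_cons_of_mem _ hy', he⟩⟩
      · intro k hk hkv hex
        obtain ⟨z, hz, hez⟩ := hex
        rcases List.mem_cons.mp hz with rfl | hz'
        · rw [hez] at hseen; exact absurd hkv hseen
        · exact rcompl k hk hkv ⟨z, hz', hez⟩

-- once the stack is empty, the class of s is exactly the c-labelled set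
lemma pvDfs_closed {n : Nat} {es : List (List Int)} {adj : List (List Int)}
    (hadj : pvAdjOk n (pvEdgesOf n es) adj) {s : Nat} (hs : s < n) {c : Int} (hc0 : 0 ≤ c)
    (cid : List Int)
    (hsc : cid.getD s (-1) = c)
    (hlab3 : ∀ k, k < n → cid.getD k (-1) = c → pvConn n es s k)
    (hlab4 : ∀ k, k < n → pvConn n es s k → cid.getD k (-1) = c ∨ cid.getD k (-1) = -1)
    (hclosed : ∀ k, k < n → cid.getD k (-1) = c →
        ∀ y ∈ adj.getD k [], cid.getD (pvNrm n y) (-1) ≠ -1)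
    (h7 : ∀ k, k < n → cid.getD k (-1) ≠ -1 → cid.getD k (-1) ≠ c →
        ∀ y ∈ adj.getD k [], cid.getD (pvNrm n y) (-1) ≠ -1) :
    ∀ k, k < n → pvConn n es s k → cid.getD k (-1) = c := by
  intro k hk hconn
  set S : Nat → Prop := fun j => j < n ∧ cid.getD j (-1) ≠ -1 with hS
  have hedge : ∀ pr ∈ pvEdgesOf n es, (S pr.1 ↔ S pr.2) := by
    intro pr hpr
    obtain ⟨h1, h2, ⟨y1, hy1, he1⟩, ⟨y2, hy2, he2⟩⟩ := hadj.2.2 pr hpr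
    constructor
    · rintro ⟨-, hv⟩
      refine ⟨h2, ?_⟩
      by_cases hcv : cid.getD pr.1 (-1) = c
      · have := hclosed pr.1 h1 hcv y1 hy1
        rw [he1] at this
        exact this
      · have := h7 pr.1 h1 hv hcv y1 hy1
        rw [he1] at this
        exact this
    · rintro ⟨-, hv⟩
      refine ⟨h1, ?_⟩
      by_cases hcv : cid.getD pr.2 (-1) = c
      · have := hclosed pr.2 h2 hcv y2 hy2
        rw [he2] at this
        exact this
      · have := h7 pr.2 h2 hv hcv y2 hy2
        rw [he2] at this
        exact this
  have hmin := pvLbl_min (pvEdgesOf n es) id S hedge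
    (fun i j h => by rw [show i = j from h]) s k hconn
  have hSs : S s := ⟨hs, by rw [hsc]; omega⟩
  have hSk : S k := hmin.mp hSs
  rcases hlab4 k hk hconn with h | h
  · exact h
  · exact absurd h hSk.2

lemma pvDfs_spec {n : Nat} {es : List (List Int)} {adj : List (List Int)}
    (hadj : pvAdjOk n (pvEdgesOf n es) adj) {s : Nat} (hs : s < n) {c : Int} (hc0 : 0 ≤ c) :
    ∀ (fuel : Nat) (cid : List Int) (stack : List Int),
    cid.length = n →
    pvUnl n cid + stack.length ≤ fuel →
    cid.getD s (-1) = c →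
    (∀ x ∈ stack, (-(n : Int) ≤ x ∧ x < (n : Int)) ∧ pvConn n es s (pvNrm n x) ∧
        cid.getD (pvNrm n x) (-1) = c) →
    (∀ k, k < n → cid.getD k (-1) = c → pvConn n es s k) →
    (∀ k, k < n → pvConn n es s k → cid.getD k (-1) = c ∨ cid.getD k (-1) = -1) →
    (∀ k, k < n → cid.getD k (-1) = c →
        (∃ x ∈ stack, pvNrm n x = k) ∨
          ∀ y ∈ adj.getD k [], cid.getD (pvNrm n y) (-1) ≠ -1) →
    (∀ k, k < n → cid.getD k (-1) ≠ -1 → cid.getD k (-1) ≠ c →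
        ∀ y ∈ adj.getD k [], cid.getD (pvNrm n y) (-1) ≠ -1) →
    (pvDfs adj c fuel cid stack).length = n ∧
    (∀ k, k < n → pvConn n es s k → (pvDfs adj c fuel cid stack).getD k (-1) = c) ∧
    (∀ k, k < n → ¬ pvConn n es s k →
        (pvDfs adj c fuel cid stack).getD k (-1) = cid.getD k (-1)) := by
  have hcne : c ≠ -1 := by omega
  intro fuel
  induction fuel with
  | zero =>
    intro cid stack hlen hfuel hsc hstack hlab3 hlab4 hclosed h7
    have hl0 : stack.length = 0 := by omega
    have hempty : stack = [] := List.length_eq_zero_iff.mp hl0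
    subst hempty
    have hclosed' : ∀ k, k < n → cid.getD k (-1) = c →
        ∀ y ∈ adj.getD k [], cid.getD (pvNrm n y) (-1) ≠ -1 := by
      intro k hk hkc
      rcases hclosed k hk hkc with ⟨x, hx, -⟩ | h
      · exact absurd hx (List.not_mem_nil)
      · exact h
    exact ⟨hlen, pvDfs_closed hadj hs hc0 cid hsc hlab3 hlab4 hclosed' h7,
      fun k hk _ => rfl⟩
  | succ fuel ih =>
    intro cid stack hlen hfuel hsc hstack hlab3 hlab4 hclosed h7
    rcases List.eq_nil_or_concat stack with rfl | ⟨rest, x, heq⟩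
    · -- empty stack: return
      have hunf : pvDfs adj c (fuel + 1) cid [] = cid := by
        rw [pvDfs_succ]
        rfl
      rw [hunf]
      have hclosed' : ∀ k, k < n → cid.getD k (-1) = c →
          ∀ y ∈ adj.getD k [], cid.getD (pvNrm n y) (-1) ≠ -1 := by
        intro k hk hkc
        rcases hclosed k hk hkc with ⟨x, hx, -⟩ | h
        · exact absurd hx (List.not_mem_nil)
        · exact h
      exact ⟨hlen, pvDfs_closed hadj hs hc0 cid hsc hlab3 hlab4 hclosed' h7,
        fun k hk _ => rfl⟩
    · -- pop x
      rw [List.concat_eq_append] at heq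
      subst heq
      have hpop : PySem.List.pop? (rest ++ [x]) = some (x, rest) := PySem.List.pop?_last rest x
      have hunf : pvDfs adj c (fuel + 1) cid (rest ++ [x])
          = pvDfs adj c fuel
              (((PySem.List.pyGetD adj x []).foldl (pvDfsVisit c) (cid, rest)).1)
              (((PySem.List.pyGetD adj x []).foldl (pvDfsVisit c) (cid, rest)).2) := by
        rw [pvDfs_succ, hpop]
      obtain ⟨⟨hx1, hx2⟩, hxconn, hxc⟩ := hstack x (by simp)
      have hnx : pvNrm n x < n := pvNrm_lt hx1 hx2
      have hys : PySem.List.pyGetD adj x [] = adj.getD (pvNrm n x) [] :=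
        pvPyGetD hadj.1 hx1 hx2
      set ys := adj.getD (pvNrm n x) [] with hysd
      have hysrange : ∀ y ∈ ys, -(n : Int) ≤ y ∧ y < (n : Int) :=
        fun y hy => (hadj.2.1 (pvNrm n x) hnx y hy).1
      have hysconn : ∀ y ∈ ys, pvConn n es s (pvNrm n y) := by
        intro y hy
        have hedge := (hadj.2.1 (pvNrm n x) hnx y hy).2
        have hconn_xy : pvConn n es (pvNrm n x) (pvNrm n y) := by
          rcases hedge with h | h
          · exact pvLbl_join (pvEdgesOf n es) id (pvNrm n x, pvNrm n y) h
          · exact (pvLbl_join (pvEdgesOf n es) id (pvNrm n y, pvNrm n x) h).symm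
        exact pvConn_trans hxconn hconn_xy
      obtain ⟨rlen, rget, new, rst, rnew, rcompl, rcnt⟩ :=
        pvVisitFold hcne ys cid rest hlen hysrange
      rw [hunf, hys]
      set mid := (ys.foldl (pvDfsVisit c) (cid, rest)).1 with hmid
      rw [rst]
      -- facts about mid
      have hpres : ∀ k, k < n → cid.getD k (-1) ≠ -1 → mid.getD k (-1) = cid.getD k (-1) := by
        intro k hk hkv
        rw [rget k hk, if_neg (by rintro ⟨h, -⟩; exact hkv h)]
      have hmono : ∀ k, k < n → cid.getD k (-1) ≠ -1 → mid.getD k (-1) ≠ -1 := by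
        intro k hk hkv
        rw [hpres k hk hkv]; exact hkv
    -- new labels are exactly the fresh neighbours of x
      have hmidval : ∀ k, k < n → mid.getD k (-1) = c ∨ mid.getD k (-1) = cid.getD k (-1) := by
        intro k hk
        rw [rget k hk]
        split_ifs with h
        · exact Or.inl rfl
        · exact Or.inr rfl
      -- apply the induction hypothesis
      have hres := ih mid (rest ++ new) rlen
        (by
          have h1 : (rest ++ [x]).length = rest.length + 1 := by simp
          have h2 : (rest ++ new).length = rest.length + new.length := by simp
          omega)
        (by rw [hpres s hs (by rw [hsc]; exact hcne)]; exact hsc)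
        (by
          intro z hz
          rcases List.mem_append.mp hz with hz' | hz'
          · obtain ⟨hr, hco, hlab⟩ := hstack z (List.mem_append_left _ hz')
            exact ⟨hr, hco, by rw [hpres _ (pvNrm_lt hr.1 hr.2) (by rw [hlab]; exact hcne)]; exact hlab⟩
          · obtain ⟨hr, hu, y', hy', he⟩ := rnew z hz'
            have hnz : pvNrm n z < n := pvNrm_lt hr.1 hr.2
            refine ⟨hr, he ▸ hysconn y' hy', ?_⟩
            rw [rget _ hnz, if_pos ⟨hu, ⟨y', hy', he⟩⟩])
        (by
          intro k hk hkc
          rw [rget k hk] at hkc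
          split_ifs at hkc with h
          · obtain ⟨-, y', hy', he⟩ := h
            exact he ▸ hysconn y' hy'
          · exact hlab3 k hk hkc)
        (by
          intro k hk hconn
          rcases hlab4 k hk hconn with h | h
          · exact Or.inl (by rw [hpres k hk (by rw [h]; exact hcne)]; exact h)
          · rcases hmidval k hk with h' | h'
            · exact Or.inl h'
            · exact Or.inr (by rw [h']; exact h))
        (by
          -- closure: every c-labelled vertex is on the new stack or fully expanded
          intro k hk hkc
          by_cases hkx : k = pvNrm n x
          · subst hkx
            refine Or.inr ?_
            intro y hy
            rw [rget _ (pvNrm_lt (hysrange y hy).1 (hysrange y hy).2)]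
            split_ifs with h
            · exact hcne
            · push_neg at h
              intro habs
              exact h habs y hy rfl
          · by_cases hold : cid.getD k (-1) = c
            · rcases hclosed k hk hold with ⟨z, hz, hez⟩ | hexp
              · rcases List.mem_append.mp hz with hz' | hz'
                · exact Or.inl ⟨z, List.mem_append_left _ hz', hez⟩
                · -- z = x, but k ≠ pvNrm x
                  have : z = x := by simpa using hz'
                  subst this
                  exact absurd hez.symm hkx
              · refine Or.inr ?_
                intro y hy
                have hny := pvNrm_lt (hadj.2.1 k hk y hy).1.1 (hadj.2.1 k hk y hy).1.2
                rw [rget _ hny]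
                split_ifs with h
                · exact hcne
                · exact hexp y hy
            · -- newly labelled: k ∈ norms of new
              by_cases hv : cid.getD k (-1) = -1
              · have hex : ∃ y ∈ ys, pvNrm n y = k := by
                  rw [rget k hk] at hkc
                  split_ifs at hkc with h
                  · exact h.2
                  · exact absurd (hv.symm.trans hkc).symm hcne
                obtain ⟨w, hw, hew⟩ := rcompl k hk hv hex
                exact Or.inl ⟨w, List.mem_append_right _ hw, hew⟩
              · rw [hpres k hk hv] at hkc
                exact absurd hkc hold)
        (by
          intro k hk hkv hkc y hy
          by_cases h : cid.getD k (-1) = -1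
          · exfalso
            rcases hmidval k hk with hmv | hmv
            · exact hkc hmv
            · rw [hmv] at hkv
              exact hkv h
          · have holdc : cid.getD k (-1) ≠ c := by
              rw [hpres k hk h] at hkc
              exact hkc
            have hny := pvNrm_lt (hadj.2.1 k hk y hy).1.1 (hadj.2.1 k hk y hy).1.2
            exact hmono _ hny (h7 k hk h holdc y hy))
      obtain ⟨flen, fconn, funch⟩ := hres
      refine ⟨flen, fconn, ?_⟩
      intro k hk hnc
      rw [funch k hk hnc, rget k hk, if_neg ?_]
      rintro ⟨-, y, hy, hey⟩
      exact hnc (hey ▸ hysconn y hy)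

-- ---------- the outer "for s in range(n)" loop ----------

lemma pvOuterFold {n : Nat} {es : List (List Int)} {adj : List (List Int)}
    (hadj : pvAdjOk n (pvEdgesOf n es) adj) :
    ∀ (k m : Nat) (cid : List Int) (cnt : Int),
    m + k = n →
    cid.length = n → 0 ≤ cnt →
    (∀ j, j < n → (cid.getD j (-1) ≠ -1 ↔ ∃ i, i < m ∧ pvConn n es i j)) →
    (∀ j, j < n → cid.getD j (-1) ≠ -1 → 0 ≤ cid.getD j (-1) ∧ cid.getD j (-1) < cnt) →
    (∀ i j, i < n → j < n → cid.getD i (-1) ≠ -1 → cid.getD j (-1) ≠ -1 →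
        (cid.getD i (-1) = cid.getD j (-1) ↔ pvConn n es i j)) →
    (((List.range' m k).map (fun j : Nat => (j : Int))).foldl (pvLabelStep adj n) (cid, cnt)).1.length = n ∧
    (∀ j, j < n →
        ((((List.range' m k).map (fun j : Nat => (j : Int))).foldl (pvLabelStep adj n) (cid, cnt)).1.getD j (-1) ≠ -1
          ↔ ∃ i, i < m + k ∧ pvConn n es i j)) ∧
    (∀ i j, i < n → j < n →
        (((List.range' m k).map (fun j : Nat => (j : Int))).foldl (pvLabelStep adj n) (cid, cnt)).1.getD i (-1) ≠ -1 →
        (((List.range' m k).map (fun j : Nat => (j : Int))).foldl (pvLabelStep adj n) (cid, cnt)).1.getD j (-1) ≠ -1 →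
        ((((List.range' m k).map (fun j : Nat => (j : Int))).foldl (pvLabelStep adj n) (cid, cnt)).1.getD i (-1)
            = (((List.range' m k).map (fun j : Nat => (j : Int))).foldl (pvLabelStep adj n) (cid, cnt)).1.getD j (-1)
          ↔ pvConn n es i j)) := by
  intro k
  induction k with
  | zero =>
    intro m cid cnt hmk hlen hcnt hiff hbnd hker
    simp only [List.range', List.map_nil, List.foldl_nil]
    exact ⟨hlen, fun j hj => by rw [Nat.add_zero]; exact hiff j hj, hker⟩
  | succ k ih =>
    intro m cid cnt hmk hlen hcnt hiff hbnd hker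
    have hmn : m < n := by omega
    rw [List.range'_succ]
    simp only [List.map_cons, List.foldl_cons]
    have hgetm : PySem.List.pyGetD cid (m : Int) (-1) = cid.getD m (-1) := by
      rw [pvPyGetD hlen (by omega) (by exact_mod_cast hmn), pvNrm_of_nonneg (by omega),
        Int.toNat_natCast]
    by_cases hseen : cid.getD m (-1) ≠ -1
    · -- already labelled: skip
      have hstep : pvLabelStep adj n (cid, cnt) (m : Int) = (cid, cnt) := by
        simp only [pvLabelStep]
        rw [if_pos (by rw [hgetm]; exact hseen)]
      rw [hstep]
      have hiff' : ∀ j, j < n → (cid.getD j (-1) ≠ -1 ↔ ∃ i, i < m + 1 ∧ pvConn n es i j) := by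
        intro j hj
        rw [hiff j hj]
        constructor
        · rintro ⟨i, hi, hc⟩
          exact ⟨i, by omega, hc⟩
        · rintro ⟨i, hi, hc⟩
          rcases Nat.lt_or_ge i m with h | h
          · exact ⟨i, h, hc⟩
          · have him : i = m := by omega
            obtain ⟨i0, hi0, hc0⟩ := (hiff m hmn).mp hseen
            exact ⟨i0, hi0, pvConn_trans hc0 (him ▸ hc)⟩
      obtain ⟨r1, r2, r3⟩ := ih (m + 1) cid cnt (by omega) hlen hcnt hiff' hbnd hker
      refine ⟨r1, ?_, r3⟩
      intro j hj
      have hmk' : m + 1 + k = m + (k + 1) := by omega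
      rw [hmk'] at r2
      exact r2 j hj
    · -- new component: label it with cnt via the DFS
      push_neg at hseen
      have hstep : pvLabelStep adj n (cid, cnt) (m : Int)
          = (pvDfs adj cnt (n + 1) (cid.set m cnt) [(m : Int)], cnt + 1) := by
        simp only [pvLabelStep]
        rw [if_neg (by rw [hgetm]; exact not_not_intro hseen)]
        rw [pvPySetD hlen _ (by omega) (by exact_mod_cast hmn), pvNrm_of_nonneg (by omega),
          Int.toNat_natCast]
      rw [hstep]
      set cid1 := cid.set m cnt with hcid1
      have hlen1 : cid1.length = n := by simp [hcid1, hlen]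
      have hcne : cnt ≠ -1 := by omega
      have hget1 : ∀ j, j < n → cid1.getD j (-1) = if j = m then cnt else cid.getD j (-1) := by
        intro j hj
        rw [hcid1, pvGetD_set hlen _ hj]
      have hnm : pvNrm n (m : Int) = m := by
        rw [pvNrm_of_nonneg (by omega)]; simp
      -- fresh label: nothing else carries cnt
      have hfresh : ∀ j, j < n → cid1.getD j (-1) = cnt → j = m := by
        intro j hj hjc
        rw [hget1 j hj] at hjc
        split_ifs at hjc with h
        · exact h
        · have := hbnd j hj (by rw [hjc]; exact hcne)
          omega
      obtain ⟨flen, fconn, funch⟩ := pvDfs_spec hadj hmn hcnt (n + 1) cid1 [(m : Int)]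
        hlen1
        (by
          have := pvUnl_le n cid1
          simp only [List.length_cons, List.length_nil]
          omega)
        (by rw [hget1 m hmn, if_pos rfl])
        (by
          intro z hz
          have : z = (m : Int) := by simpa using hz
          subst this
          exact ⟨⟨by omega, by exact_mod_cast hmn⟩,
            by rw [hnm]; exact pvConn_refl n es m,
            by rw [hnm, hget1 m hmn, if_pos rfl]⟩)
        (by
          intro j hj hjc
          rw [(hfresh j hj hjc)]
          exact pvConn_refl n es m)
        (by
          intro j hj hconn
          rcases eq_or_ne j m with rfl | hne
          · exact Or.inl (by rw [hget1 j hj, if_pos rfl])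
          · right
            rw [hget1 j hj, if_neg hne]
            by_contra habs
            obtain ⟨i0, hi0, hc0⟩ := (hiff j hj).mp habs
            have : cid.getD m (-1) ≠ -1 :=
              (hiff m hmn).mpr ⟨i0, hi0, pvConn_trans hc0 (pvConn_symm hconn)⟩
            exact this hseen)
        (by
          intro j hj hjc
          exact Or.inl ⟨(m : Int), by simp, by rw [hnm]; exact (hfresh j hj hjc).symm⟩)
        (by
          intro j hj hjv hjc y hy
          have hjm : j ≠ m := by
            intro h
            subst h
            rw [hget1 j hj, if_pos rfl] at hjc
            exact hjc rfl
          rw [hget1 j hj, if_neg hjm] at hjv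
          obtain ⟨i0, hi0, hc0⟩ := (hiff j hj).mp hjv
          have hconn_jy : pvConn n es j (pvNrm n y) := by
            have hedge := (hadj.2.1 j hj y hy).2
            rcases hedge with h | h
            · exact pvLbl_join (pvEdgesOf n es) id (j, pvNrm n y) h
            · exact (pvLbl_join (pvEdgesOf n es) id (pvNrm n y, j) h).symm
          have hny := pvNrm_lt (hadj.2.1 j hj y hy).1.1 (hadj.2.1 j hj y hy).1.2
          have : cid.getD (pvNrm n y) (-1) ≠ -1 :=
            (hiff _ hny).mpr ⟨i0, hi0, pvConn_trans hc0 hconn_jy⟩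
          rw [hget1 _ hny]
          split_ifs with h
          · exact hcne
          · exact this)
      set cid2 := pvDfs adj cnt (n + 1) cid1 [(m : Int)] with hcid2
      -- characterise cid2
      have hval2c : ∀ j, j < n → pvConn n es m j → cid2.getD j (-1) = cnt := fconn
      have hval2n : ∀ j, j < n → ¬ pvConn n es m j →
          cid2.getD j (-1) = cid.getD j (-1) := by
        intro j hj h
        rw [funch j hj h, hget1 j hj]
        rw [if_neg (by
          intro hjm
          rw [hjm] at h
          exact h (pvConn_refl n es m))]
      have hiff2 : ∀ j, j < n → (cid2.getD j (-1) ≠ -1 ↔ ∃ i, i < m + 1 ∧ pvConn n es i j) := by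
        intro j hj
        by_cases h : pvConn n es m j
        · rw [hval2c j hj h]
          constructor
          · intro _; exact ⟨m, by omega, h⟩
          · intro _; exact hcne
        · rw [hval2n j hj h, hiff j hj]
          constructor
          · rintro ⟨i, hi, hc⟩; exact ⟨i, by omega, hc⟩
          · rintro ⟨i, hi, hc⟩
            rcases Nat.lt_or_ge i m with h' | h'
            · exact ⟨i, h', hc⟩
            · have him : i = m := by omega
              exact absurd (him ▸ hc) h
      have hbnd2 : ∀ j, j < n → cid2.getD j (-1) ≠ -1 →
          0 ≤ cid2.getD j (-1) ∧ cid2.getD j (-1) < cnt + 1 := by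
        intro j hj hjv
        by_cases h : pvConn n es m j
        · rw [hval2c j hj h]
          omega
        · rw [hval2n j hj h] at hjv ⊢
          have := hbnd j hj hjv
          omega
      have hker2 : ∀ i j, i < n → j < n → cid2.getD i (-1) ≠ -1 → cid2.getD j (-1) ≠ -1 →
          (cid2.getD i (-1) = cid2.getD j (-1) ↔ pvConn n es i j) := by
        intro i j hi hj hiv hjv
        by_cases h1 : pvConn n es m i <;> by_cases h2 : pvConn n es m j
        · rw [hval2c i hi h1, hval2c j hj h2]
          constructor
          · intro _; exact pvConn_trans (pvConn_symm h1) h2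
          · intro _; rfl
        · rw [hval2c i hi h1, hval2n j hj h2]
          rw [hval2n j hj h2] at hjv
          have hb := hbnd j hj hjv
          constructor
          · intro habs; omega
          · intro hcnn; exact absurd (pvConn_trans h1 hcnn) h2
        · rw [hval2n i hi h1, hval2c j hj h2]
          rw [hval2n i hi h1] at hiv
          have hb := hbnd i hi hiv
          constructor
          · intro habs; omega
          · intro hcnn; exact absurd (pvConn_trans h2 (pvConn_symm hcnn)) h1
        · rw [hval2n i hi h1, hval2n j hj h2]
          rw [hval2n i hi h1] at hiv
          rw [hval2n j hj h2] at hjv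
          exact hker i j hi hj hiv hjv
      obtain ⟨r1, r2, r3⟩ := ih (m + 1) cid2 (cnt + 1) (by omega) flen (by omega) hiff2 hbnd2 hker2
      refine ⟨r1, ?_, r3⟩
      intro j hj
      have hmk' : m + 1 + k = m + (k + 1) := by omega
      rw [hmk'] at r2
      exact r2 j hj

-- ---------- irange ----------

def pvIrange (n : Nat) : List Int := (List.range n).map (fun k : Nat => (k : Int))

lemma pvMem_irange {n : Nat} {x : Int} : x ∈ pvIrange n ↔ 0 ≤ x ∧ x < n := by
  unfold pvIrange
  rw [List.mem_map]
  constructor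
  · rintro ⟨k, hk, rfl⟩
    rw [List.mem_range] at hk
    constructor <;> omega
  · rintro ⟨h0, hn⟩
    exact ⟨x.toNat, List.mem_range.mpr (by omega), by omega⟩

lemma pvIrange_getD {n k : Nat} (hk : k < n) : (pvIrange n).getD k 0 = (k : Int) := by
  unfold pvIrange
  rw [List.getD_eq_getElem _ _ (by simpa using hk)]
  simp

lemma pvIrange_len (n : Nat) : (pvIrange n).length = n := by
  unfold pvIrange; simp

lemma pvInit_good (n : Nat) : pvGood n (pvIrange n) := by
  refine ⟨pvIrange_len n, fun k hk => ?_, fun k hk => ?_⟩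
  · rw [pvIrange_getD hk]
    constructor <;> omega
  · refine ⟨k, ⟨0, rfl⟩, ?_⟩
    unfold pvFix pvStp
    rw [pvIrange_getD hk]
    simp

lemma pvInit_rt {n : Nat} {k : Nat} (hk : k < n) : pvRt n (pvIrange n) k = k := by
  apply pvRt_of_fix (pvInit_good n) hk
  unfold pvFix pvStp
  rw [pvIrange_getD hk]
  simp

-- ---------- A phases: replace the threaded find by the stable root function ----------

lemma pvP1_fold {n : Nat} {p1 : List Int} (source : List Int) :
    ∀ (ks : List Int) (p : List Int) (d : PySem.Dict Int (PySem.Dict Int Int)),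
    (∀ i ∈ ks, 0 ≤ i ∧ i < (n : Int)) → pvGood n p →
    (∀ y, y < n → pvRt n p y = pvRt n p1 y) →
    pvGood n (ks.foldl (pvP1Step source) (p, d)).1 ∧
    (∀ y, y < n → pvRt n (ks.foldl (pvP1Step source) (p, d)).1 y = pvRt n p1 y) ∧
    (ks.foldl (pvP1Step source) (p, d)).2 =
      ks.foldl (fun d i => d.modify ((pvRt n p1 i.toNat : Nat) : Int) PySem.Dict.empty
        (fun c => c.modify (PySem.List.pyGetD source i 0) 0 (· + 1))) d := by
  intro ks
  induction ks with
  | nil => exact fun p d _ hg hpres => ⟨hg, hpres, rfl⟩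
  | cons i t ih =>
    intro p d hks hg hpres
    obtain ⟨hi0, hin⟩ := hks i List.mem_cons_self
    have hfuel : n + 1 ≤ p.length + 1 := by rw [hg.1]
    obtain ⟨hval, hg', hpres'⟩ := pvFind_full hg (x := i) (by omega) hin hfuel
    have hnrm : pvNrm n i = i.toNat := pvNrm_of_nonneg hi0
    have hval' : (pvFind (p.length + 1) p i).1 = ((pvRt n p1 i.toNat : Nat) : Int) := by
      rw [hval, hnrm, hpres i.toNat (by omega)]
    simp only [List.foldl_cons, pvP1Step]
    rw [hval']
    exact ih (pvFind (p.length + 1) p i).2 _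
      (fun j hj => hks j (List.mem_cons_of_mem _ hj)) hg'
      (fun y hy => by rw [hpres' y hy, hpres y hy])

def pvP2Pure (target : List Int) (R : Int → Int)
    (dh : PySem.Dict Int (PySem.Dict Int Int) × Int) (i : Int) :
    PySem.Dict Int (PySem.Dict Int Int) × Int :=
  let c := dh.1.getD (R i) PySem.Dict.empty
  if c.getD (PySem.List.pyGetD target i 0) 0 > 0 then
    (dh.1.insert (R i) (c.modify (PySem.List.pyGetD target i 0) 0 (· - 1)), dh.2)
  else (dh.1, dh.2 + 1)

lemma pvP2_fold {n : Nat} {p1 : List Int} (target : List Int) :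
    ∀ (ks : List Int) (p : List Int) (d : PySem.Dict Int (PySem.Dict Int Int)) (h : Int),
    (∀ i ∈ ks, 0 ≤ i ∧ i < (n : Int)) → pvGood n p →
    (∀ y, y < n → pvRt n p y = pvRt n p1 y) →
    (ks.foldl (pvP2Step target) (p, d, h)).2 =
      ks.foldl (pvP2Pure target (fun i => ((pvRt n p1 i.toNat : Nat) : Int))) (d, h) := by
  intro ks
  induction ks with
  | nil => exact fun p d h _ h1 h2 => rfl
  | cons i t ih =>
    intro p d h hks hg hpres
    obtain ⟨hi0, hin⟩ := hks i List.mem_cons_self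
    have hfuel : n + 1 ≤ p.length + 1 := by rw [hg.1]
    obtain ⟨hval, hg', hpres'⟩ := pvFind_full hg (x := i) (by omega) hin hfuel
    have hval' : (pvFind (p.length + 1) p i).1 = ((pvRt n p1 i.toNat : Nat) : Int) := by
      rw [hval, pvNrm_of_nonneg hi0, hpres i.toNat (by omega)]
    simp only [List.foldl_cons, pvP2Step, pvP2Pure]
    rw [hval']
    have hpres'' : ∀ y, y < n → pvRt n (pvFind (p.length + 1) p i).2 y = pvRt n p1 y :=
      fun y hy => by rw [hpres' y hy, hpres y hy]
    have htl := fun d' h' => ih (pvFind (p.length + 1) p i).2 d' h'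
      (fun j hj => hks j (List.mem_cons_of_mem _ hj)) hg' hpres''
    split_ifs with hc
    · exact htl _ _
    · exact htl _ _

def pvHA (target : List Int) (R : Int → Int) :
    PySem.Dict Int (PySem.Dict Int Int) → List Int → Int
  | _, [] => 0
  | d, i :: ks =>
    let c := d.getD (R i) PySem.Dict.empty
    if c.getD (PySem.List.pyGetD target i 0) 0 > 0 then
      pvHA target R (d.insert (R i) (c.modify (PySem.List.pyGetD target i 0) 0 (· - 1))) ks
    else pvHA target R d ks + 1

lemma pvP2Pure_ham (target : List Int) (R : Int → Int) :
    ∀ (ks : List Int) (d : PySem.Dict Int (PySem.Dict Int Int)) (h : Int),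
    (ks.foldl (pvP2Pure target R) (d, h)).2 = h + pvHA target R d ks := by
  intro ks
  induction ks with
  | nil => intro d h; simp [pvHA]
  | cons i t ih =>
    intro d h
    simp only [List.foldl_cons, pvP2Pure, pvHA]
    split_ifs with hc
    · rw [ih]
    · rw [ih]
      ring

-- ---------- counting: grouped dictionaries and the greedy pass ----------

lemma pvGroup_fold {ν : Type} (key : Int → Int) (e : ν) (f : Int → ν → ν) :
    ∀ (ks : List Int) (d : PySem.Dict Int ν) (r : Int),
    (ks.foldl (fun d i => d.modify (key i) e (f i)) d).getD r e
      = (ks.filter (fun i => key i == r)).foldl (fun acc i => f i acc) (d.getD r e) := by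
  intro ks
  induction ks with
  | nil => intro d r; rfl
  | cons i t ih =>
    intro d r
    simp only [List.foldl_cons, List.filter_cons]
    rcases eq_or_ne (key i) r with he | he
    · rw [ih, PySem.Dict.getD_modify]
      simp [he]
    · rw [ih, PySem.Dict.getD_modify]
      rw [if_neg (Ne.symm he), if_neg (by simpa using he)]

def pvG : PySem.Dict Int Int → List Int → Int
  | _, [] => 0
  | c, t :: ts => if c.getD t 0 > 0 then pvG (c.modify t 0 (· - 1)) ts else pvG c ts + 1

lemma pvHA_decomp (target : List Int) (R : Int → Int) :
    ∀ (ks : List Int) (d : PySem.Dict Int (PySem.Dict Int Int)) (S : Finset Int),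
    (∀ i ∈ ks, R i ∈ S) →
    pvHA target R d ks = ∑ r ∈ S, pvG (d.getD r PySem.Dict.empty)
      ((ks.filter (fun i => R i == r)).map (fun i => PySem.List.pyGetD target i 0)) := by
  intro ks
  induction ks with
  | nil =>
    intro d S _
    simp [pvHA, pvG]
  | cons i t ih =>
    intro d S hS
    have hr0 : R i ∈ S := hS i List.mem_cons_self
    have hfo : ∀ r, r ≠ R i → (i :: t).filter (fun j => R j == r) = t.filter (fun j => R j == r) := by
      intro r hr
      rw [List.filter_cons_of_neg (by simpa using Ne.symm hr)]
    have hfr : (i :: t).filter (fun j => R j == R i) = i :: t.filter (fun j => R j == R i) := by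
      rw [List.filter_cons_of_pos (by simp)]
    simp only [pvHA]
    split_ifs with hc
    · rw [ih _ S (fun j hj => hS j (List.mem_cons_of_mem _ hj))]
      rw [← Finset.add_sum_erase _ _ hr0, ← Finset.add_sum_erase _ _ hr0]
      congr 1
      · rw [PySem.Dict.getD_insert, if_pos rfl, hfr]
        simp only [List.map_cons]
        rw [pvG]
        rw [if_pos hc]
      · apply Finset.sum_congr rfl
        intro r hr
        rw [PySem.Dict.getD_insert, if_neg (Finset.ne_of_mem_erase hr),
          hfo r (Finset.ne_of_mem_erase hr)]
    · rw [ih _ S (fun j hj => hS j (List.mem_cons_of_mem _ hj))]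
      rw [← Finset.add_sum_erase _ _ hr0, ← Finset.add_sum_erase _ _ hr0]
      have hterm : pvG (d.getD (R i) PySem.Dict.empty)
          (((i :: t).filter (fun j => R j == R i)).map (fun j => PySem.List.pyGetD target j 0))
          = pvG (d.getD (R i) PySem.Dict.empty)
            ((t.filter (fun j => R j == R i)).map (fun j => PySem.List.pyGetD target j 0)) + 1 := by
        rw [hfr]
        simp only [List.map_cons]
        rw [pvG, if_neg hc]
      rw [hterm]
      have hrest : ∑ r ∈ S.erase (R i), pvG (d.getD r PySem.Dict.empty)
            (((i :: t).filter (fun j => R j == r)).map (fun j => PySem.List.pyGetD target j 0))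
          = ∑ r ∈ S.erase (R i), pvG (d.getD r PySem.Dict.empty)
            ((t.filter (fun j => R j == r)).map (fun j => PySem.List.pyGetD target j 0)) := by
        apply Finset.sum_congr rfl
        intro r hr
        rw [hfo r (Finset.ne_of_mem_erase hr)]
      rw [hrest]
      ring

lemma pvG_closed : ∀ (ts : List Int) (c : PySem.Dict Int Int),
    (∀ v, 0 ≤ c.getD v 0) →
    pvG c ts = (ts.length : Int) - ∑ v ∈ ts.toFinset, min (c.getD v 0) ((ts.count v : Int)) := by
  intro ts
  induction ts with
  | nil => intro c _; simp [pvG]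
  | cons a ts ih =>
    intro c hpos
    rw [pvG]
    rw [List.toFinset_cons]
    split_ifs with hc
    · have hpos' : ∀ v, 0 ≤ (c.modify a 0 (· - 1)).getD v 0 := by
        intro v
        rw [PySem.Dict.getD_modify]
        split_ifs with h
        · omega
        · exact hpos v
      rw [ih _ hpos']
      have hsum : ∑ v ∈ insert a ts.toFinset, min (c.getD v 0) (((a :: ts).count v : Int))
          = (∑ v ∈ ts.toFinset, min ((c.modify a 0 (· - 1)).getD v 0) ((ts.count v : Int))) + 1 := by
        by_cases hmem : a ∈ ts.toFinset
        · rw [Finset.insert_eq_self.mpr hmem]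
          rw [← Finset.add_sum_erase _ _ hmem, ← Finset.add_sum_erase _ _ hmem]
          have h1 : min (c.getD a 0) (((a :: ts).count a : Int))
              = min ((c.modify a 0 (· - 1)).getD a 0) ((ts.count a : Int)) + 1 := by
            rw [PySem.Dict.getD_modify, if_pos rfl, List.count_cons_self]
            push_cast
            omega
          rw [h1]
          have h2 : ∑ v ∈ ts.toFinset.erase a, min (c.getD v 0) (((a :: ts).count v : Int))
              = ∑ v ∈ ts.toFinset.erase a,
                  min ((c.modify a 0 (· - 1)).getD v 0) ((ts.count v : Int)) := by
            apply Finset.sum_congr rfl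
            intro v hv
            rw [PySem.Dict.getD_modify, if_neg (Finset.ne_of_mem_erase hv),
              List.count_cons_of_ne (Ne.symm (Finset.ne_of_mem_erase hv))]
          rw [h2]
          ring
        · rw [Finset.sum_insert hmem]
          have h1 : min (c.getD a 0) (((a :: ts).count a : Int)) = 1 := by
            rw [List.count_cons_self, List.count_eq_zero_of_not_mem (fun hm => hmem (List.mem_toFinset.mpr hm))]
            push_cast
            omega
          rw [h1]
          have h2 : ∑ v ∈ ts.toFinset, min (c.getD v 0) (((a :: ts).count v : Int))
              = ∑ v ∈ ts.toFinset,
                  min ((c.modify a 0 (· - 1)).getD v 0) ((ts.count v : Int)) := by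
            apply Finset.sum_congr rfl
            intro v hv
            have hva : v ≠ a := fun h => hmem (h ▸ hv)
            rw [PySem.Dict.getD_modify, if_neg hva, List.count_cons_of_ne (Ne.symm hva)]
          rw [h2]
          ring
      rw [hsum]
      simp only [List.length_cons]
      push_cast
      ring
    · rw [ih _ hpos]
      have hca : c.getD a 0 = 0 := le_antisymm (by omega) (hpos a)
      have hsum : ∑ v ∈ insert a ts.toFinset, min (c.getD v 0) (((a :: ts).count v : Int))
          = ∑ v ∈ ts.toFinset, min (c.getD v 0) ((ts.count v : Int)) := by
        by_cases hmem : a ∈ ts.toFinset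
        · rw [Finset.insert_eq_self.mpr hmem]
          apply Finset.sum_congr rfl
          intro v hv
          rcases eq_or_ne v a with rfl | hva
          · rw [hca]
            simp only [List.count_cons_self]
            push_cast
            omega
          · rw [List.count_cons_of_ne (Ne.symm hva)]
        · rw [Finset.sum_insert hmem]
          have h1 : min (c.getD a 0) (((a :: ts).count a : Int)) = 0 := by
            rw [hca]
            have : (0 : Int) ≤ ((a :: ts).count a : Int) := by positivity
            omega
          rw [h1]
          have h2 : ∑ v ∈ ts.toFinset, min (c.getD v 0) (((a :: ts).count v : Int))
              = ∑ v ∈ ts.toFinset, min (c.getD v 0) ((ts.count v : Int)) := by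
            apply Finset.sum_congr rfl
            intro v hv
            have hva : v ≠ a := fun h => hmem (h ▸ hv)
            rw [List.count_cons_of_ne (Ne.symm hva)]
          rw [h2]
          ring
      rw [hsum]
      simp only [List.length_cons]
      push_cast
      ring

lemma pvD1_getD (source : List Int) (key : Int → Int) (ks : List Int) (r : Int) :
    (ks.foldl (fun d i => d.modify (key i) PySem.Dict.empty
        (fun c => c.modify (PySem.List.pyGetD source i 0) 0 (· + 1))) PySem.Dict.empty).getD
      r PySem.Dict.empty
      = PySem.Dict.counter ((ks.filter (fun i => key i == r)).map
          (fun i => PySem.List.pyGetD source i 0)) := by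
  rw [pvGroup_fold]
  rw [PySem.Dict.counter_eq_foldl, List.foldl_map]
  rfl

-- ---------- per-component term, shared by both ports ----------

def pvTerm (source target : List Int) (L : List Int) : Int :=
  (L.length : Int) -
    ∑ v ∈ (L.map (fun i => PySem.List.pyGetD source i 0)).toFinset
        ∪ (L.map (fun i => PySem.List.pyGetD target i 0)).toFinset,
      min (((L.map (fun i => PySem.List.pyGetD source i 0)).count v : Int))
          (((L.map (fun i => PySem.List.pyGetD target i 0)).count v : Int))

lemma pvSum_min_src (svals tvals : List Int) :
    ∑ v ∈ svals.toFinset, min ((svals.count v : Int)) ((tvals.count v : Int))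
      = ∑ v ∈ svals.toFinset ∪ tvals.toFinset,
          min ((svals.count v : Int)) ((tvals.count v : Int)) := by
  apply Finset.sum_subset Finset.subset_union_left
  intro v _ hv
  have : svals.count v = 0 := by
    rw [List.count_eq_zero]
    exact fun hm => hv (List.mem_toFinset.mpr hm)
  rw [this]
  simp

lemma pvSum_min_tgt (svals tvals : List Int) :
    ∑ v ∈ tvals.toFinset, min ((svals.count v : Int)) ((tvals.count v : Int))
      = ∑ v ∈ svals.toFinset ∪ tvals.toFinset,
          min ((svals.count v : Int)) ((tvals.count v : Int)) := by
  apply Finset.sum_subset Finset.subset_union_right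
  intro v _ hv
  have : tvals.count v = 0 := by
    rw [List.count_eq_zero]
    exact fun hm => hv (List.mem_toFinset.mpr hm)
  rw [this]
  simp

lemma pvTermA (source target : List Int) (L : List Int) :
    pvG (PySem.Dict.counter (L.map (fun i => PySem.List.pyGetD source i 0)))
        (L.map (fun i => PySem.List.pyGetD target i 0)) = pvTerm source target L := by
  rw [pvG_closed _ _ (fun v => by rw [PySem.Dict.getD_counter]; positivity)]
  unfold pvTerm
  rw [List.length_map]
  congr 1
  have : ∀ v, PySem.Dict.getD (PySem.Dict.counter (L.map (fun i => PySem.List.pyGetD source i 0))) v 0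
      = ((L.map (fun i => PySem.List.pyGetD source i 0)).count v : Int) :=
    fun v => PySem.Dict.getD_counter _ v
  calc ∑ v ∈ (L.map (fun i => PySem.List.pyGetD target i 0)).toFinset,
        min (PySem.Dict.getD (PySem.Dict.counter (L.map (fun i => PySem.List.pyGetD source i 0))) v 0)
          (((L.map (fun i => PySem.List.pyGetD target i 0)).count v : Int))
      = ∑ v ∈ (L.map (fun i => PySem.List.pyGetD target i 0)).toFinset,
        min (((L.map (fun i => PySem.List.pyGetD source i 0)).count v : Int))
          (((L.map (fun i => PySem.List.pyGetD target i 0)).count v : Int)) := by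
        apply Finset.sum_congr rfl
        intro v _
        rw [this v]
    _ = _ := pvSum_min_tgt _ _

lemma pvToFinset_ofList (xs : List Int) : (PySem.Set.ofList xs).toFinset = xs.toFinset := by
  apply Finset.ext
  intro v
  rw [List.mem_toFinset, List.mem_toFinset, PySem.Set.mem_ofList]

lemma pvTermB (source target : List Int) (L : List Int) :
    (L.length : Int) -
      (PySem.Dict.counter (L.map (fun i => PySem.List.pyGetD source i 0))).items.foldl
        (fun s kv => s + min kv.2
          ((PySem.Dict.counter (L.map (fun i => PySem.List.pyGetD target i 0))).getD kv.1 0)) 0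
      = pvTerm source target L := by
  rw [PySem.List.foldl_add, PySem.Dict.items_counter]
  unfold pvTerm
  congr 1
  rw [List.map_map, zero_add]
  have h1 : ((PySem.Set.ofList (L.map (fun i => PySem.List.pyGetD source i 0))).map
      ((fun kv : Int × Int => min kv.2
        ((PySem.Dict.counter (L.map (fun i => PySem.List.pyGetD target i 0))).getD kv.1 0))
        ∘ (fun k => (k, ((L.map (fun i => PySem.List.pyGetD source i 0)).count k : Int))))).sum
      = ∑ v ∈ (L.map (fun i => PySem.List.pyGetD source i 0)).toFinset,
          min (((L.map (fun i => PySem.List.pyGetD source i 0)).count v : Int))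
            (((L.map (fun i => PySem.List.pyGetD target i 0)).count v : Int)) := by
    rw [← pvToFinset_ofList (L.map (fun i => PySem.List.pyGetD source i 0))]
    rw [List.sum_toFinset _ (PySem.Set.nodup_ofList _)]
    congr 1
    apply List.map_congr_left
    intro v _
    simp only [Function.comp]
    rw [PySem.Dict.getD_counter]
  rw [h1, pvSum_min_src]

-- ---------- summing one term per component: labels vs leaders ----------

def pvLead (g : Nat → Int) (n : Nat) : Finset Nat :=
  (Finset.range n).filter (fun k => ∀ j, j < k → g j ≠ g k)

lemma pvLabel_sum (g : Nat → Int) (n : Nat) (F : Int → Int) :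
    ∑ r ∈ ((List.range n).map g).toFinset, F r = ∑ k ∈ pvLead g n, F (g k) := by
  symm
  apply Finset.sum_bij (i := fun k _ => g k)
  · intro k hk
    rw [List.mem_toFinset, List.mem_map]
    obtain ⟨hkn, -⟩ := Finset.mem_filter.mp hk
    exact ⟨k, List.mem_range.mpr (Finset.mem_range.mp hkn), rfl⟩
  · intro a ha b hb hgab
    obtain ⟨-, hla⟩ := Finset.mem_filter.mp ha
    obtain ⟨-, hlb⟩ := Finset.mem_filter.mp hb
    by_contra hne
    rcases Nat.lt_or_ge a b with h | h
    · exact hlb a h hgab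
    · have : b < a := by omega
      exact hla b this hgab.symm
  · intro r hr
    rw [List.mem_toFinset, List.mem_map] at hr
    obtain ⟨k0, hk0, hg0⟩ := hr
    rw [List.mem_range] at hk0
    have hP : ∃ k, k < n ∧ g k = r := ⟨k0, hk0, hg0⟩
    classical
    refine ⟨Nat.find hP, ?_, (Nat.find_spec hP).2⟩
    rw [pvLead, Finset.mem_filter, Finset.mem_range]
    refine ⟨(Nat.find_spec hP).1, ?_⟩
    intro j hj hgj
    have hfind : Nat.find hP ≤ k0 := Nat.find_le ⟨hk0, hg0⟩
    exact Nat.find_min hP hj ⟨by omega, hgj.trans (Nat.find_spec hP).2⟩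
  · intro k hk
    rfl

def pvTotal (source target : List Int) (g : Nat → Int) (n : Nat) : Int :=
  ∑ r ∈ ((List.range n).map g).toFinset,
    pvTerm source target ((pvIrange n).filter (fun i => g i.toNat == r))

lemma pvTotal_ker (source target : List Int) (n : Nat) (gA gB : Nat → Int)
    (hker : ∀ i j, i < n → j < n → (gA i = gA j ↔ gB i = gB j)) :
    pvTotal source target gA n = pvTotal source target gB n := by
  unfold pvTotal
  rw [pvLabel_sum gA, pvLabel_sum gB]
  have hlead : pvLead gA n = pvLead gB n := by
    unfold pvLead
    apply Finset.filter_congr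
    intro k hk
    rw [Finset.mem_range] at hk
    constructor
    · intro h j hj hgb
      exact h j hj ((hker j k (by omega) hk).mpr hgb)
    · intro h j hj hga
      exact h j hj ((hker j k (by omega) hk).mp hga)
  rw [hlead]
  apply Finset.sum_congr rfl
  intro k hk
  have hkn : k < n := by
    have := Finset.mem_filter.mp hk
    exact Finset.mem_range.mp this.1
  have hfilter : (pvIrange n).filter (fun i => gA i.toNat == gA k)
      = (pvIrange n).filter (fun i => gB i.toNat == gB k) := by
    apply List.filter_congr
    intro i hi
    obtain ⟨h0, hn⟩ := pvMem_irange.mp hi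
    have hiff := hker i.toNat k (by omega) hkn
    by_cases h : gA i.toNat = gA k
    · rw [beq_iff_eq.mpr h, Eq.symm (beq_iff_eq.mpr (hiff.mp h))]
    · rw [beq_eq_false_iff_ne.mpr h, Eq.symm (beq_eq_false_iff_ne.mpr (fun hb => h (hiff.mpr hb)))]
  rw [hfilter]

-- ---------- evaluating the two ports ----------

lemma pvPyRange_eq (n : Nat) : PySem.List.pyRange 0 (n : Int) 1 = pvIrange n := by
  rw [PySem.List.pyRange_zero_nat]
  rfl

lemma pvPortA_eq (source target : List Int) (swaps : List (List Int))
    (hg1 : pvGood source.length (swaps.foldl pvAStepF (pvIrange source.length))) :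
    minimum_hamming_distance source target swaps
      = pvTotal source target
          (fun k => ((pvRt source.length (swaps.foldl pvAStepF (pvIrange source.length)) k
            : Nat) : Int))
          source.length := by
  set n := source.length with hn
  have hstep1 : minimum_hamming_distance source target swaps
      = ((PySem.List.pyRange 0 (n : Int) 1).foldl (pvP2Step target)
          ((((PySem.List.pyRange 0 (n : Int) 1).foldl (pvP1Step source)
              (swaps.foldl pvAStepF (PySem.List.pyRange 0 (n : Int) 1), PySem.Dict.empty)).1),
            (((PySem.List.pyRange 0 (n : Int) 1).foldl (pvP1Step source)
              (swaps.foldl pvAStepF (PySem.List.pyRange 0 (n : Int) 1), PySem.Dict.empty)).2),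
            0)).2.2 := rfl
  rw [hstep1, pvPyRange_eq]
  set p1 := swaps.foldl pvAStepF (pvIrange n) with hp1
  have hks : ∀ i ∈ pvIrange n, 0 ≤ i ∧ i < (n : Int) := fun i hi => pvMem_irange.mp hi
  obtain ⟨hs1good, hs1pres, hs1d⟩ :=
    pvP1_fold (n := n) (p1 := p1) source (pvIrange n) p1 PySem.Dict.empty hks hg1
      (fun y hy => rfl)
  have hph2 := pvP2_fold (n := n) (p1 := p1) target (pvIrange n)
    ((pvIrange n).foldl (pvP1Step source) (p1, PySem.Dict.empty)).1
    ((pvIrange n).foldl (pvP1Step source) (p1, PySem.Dict.empty)).2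
    0 hks hs1good hs1pres
  rw [hph2, pvP2Pure_ham, hs1d, zero_add]
  rw [pvHA_decomp target (fun i => ((pvRt n p1 i.toNat : Nat) : Int)) (pvIrange n) _
    (((pvIrange n).map (fun i => ((pvRt n p1 i.toNat : Nat) : Int))).toFinset)
    (fun i hi => List.mem_toFinset.mpr (List.mem_map.mpr ⟨i, hi, rfl⟩))]
  have hmaps : ((pvIrange n).map (fun i => ((pvRt n p1 i.toNat : Nat) : Int)))
      = (List.range n).map (fun k => ((pvRt n p1 k : Nat) : Int)) := by
    rw [pvIrange, List.map_map]
    rfl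
  rw [hmaps]
  unfold pvTotal
  apply Finset.sum_congr rfl
  intro r _
  rw [pvD1_getD source (fun i => ((pvRt n p1 i.toNat : Nat) : Int)) (pvIrange n) r]
  exact pvTermA source target _

lemma pvFoldl_id : ∀ (L : List Int) (init : List Int),
    L.foldl (fun acc i => acc ++ [i]) init = init ++ L := by
  intro L
  induction L with
  | nil => intro init; simp
  | cons a t ih =>
    intro init
    simp only [List.foldl_cons, ih]
    simp

lemma pvPortB_eq (source target : List Int) (swaps : List (List Int)) (cid : List Int)
    (hlen : cid.length = source.length)
    (hcid : cid = ((PySem.List.pyRange 0 ((source.length : Nat) : Int) 1).foldl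
        (pvLabelStep (swaps.foldl pvAdjStep (List.replicate source.length ([] : List Int)))
          source.length)
        (List.replicate source.length (-1 : Int), 0)).1) :
    minimum_hamming_distance_alt source target swaps
      = pvTotal source target (fun k => cid.getD k (-1)) source.length := by
  set n := source.length with hn
  have hstep1 : minimum_hamming_distance_alt source target swaps
      = (((PySem.List.pyRange 0 (n : Int) 1).foldl
          (fun (g : PySem.Dict Int (List Int)) i =>
            g.modify (PySem.List.pyGetD cid i (-1)) [] (fun l => l ++ [i]))
          PySem.Dict.empty).values).foldl
        (fun total idxs =>
          total + ((idxs.length : Int)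
            - (PySem.Dict.counter (idxs.map (fun i => PySem.List.pyGetD source i 0))).items.foldl
                (fun s kv => s + min kv.2
                  ((PySem.Dict.counter (idxs.map (fun i => PySem.List.pyGetD target i 0))).getD
                    kv.1 0)) 0)) 0 := by
    rw [hcid]
    rfl
  rw [hstep1, pvPyRange_eq]
  set keyB : Int → Int := fun i => PySem.List.pyGetD cid i (-1) with hkeyB
  set groups := (pvIrange n).foldl
      (fun (g : PySem.Dict Int (List Int)) i => g.modify (keyB i) [] (fun l => l ++ [i]))
      PySem.Dict.empty with hgroups
  have hkeys : groups.keys = PySem.Set.ofList ((pvIrange n).map keyB) := by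
    rw [hgroups, PySem.Dict.keys_foldl_modify_key (pvIrange n) keyB []
      (fun _ i l => l ++ [i]) PySem.Dict.empty]
    rw [PySem.Dict.keys_empty]
    rfl
  have hnd : groups.keys.Nodup := by
    rw [hgroups]
    exact PySem.Dict.nodup_keys_foldl_modify_key _ keyB [] (fun _ i l => l ++ [i]) _
      (by rw [PySem.Dict.keys_empty]; exact List.nodup_nil)
  have hgetD : ∀ l, groups.getD l [] = (pvIrange n).filter (fun i => keyB i == l) := by
    intro l
    rw [hgroups, pvGroup_fold keyB [] (fun i s => s ++ [i]) (pvIrange n) PySem.Dict.empty l]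
    rw [PySem.Dict.getD_empty, pvFoldl_id]
    simp
  have hvalues : groups.values
      = groups.keys.map (fun l => groups.getD l []) := by
    unfold PySem.Dict.values
    rw [PySem.Dict.items_eq_map_keys groups hnd [], List.map_map]
    rfl
  rw [hvalues]
  rw [PySem.List.foldl_add]
  rw [zero_add, List.map_map]
  have hterm : groups.keys.map ((fun idxs => ((idxs.length : Int)
      - (PySem.Dict.counter (idxs.map (fun i => PySem.List.pyGetD source i 0))).items.foldl
          (fun s kv => s + min kv.2
            ((PySem.Dict.counter (idxs.map (fun i => PySem.List.pyGetD target i 0))).getD kv.1 0))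
          0)) ∘ (fun l => groups.getD l []))
      = groups.keys.map (fun l => pvTerm source target
          ((pvIrange n).filter (fun i => keyB i == l))) := by
    apply List.map_congr_left
    intro l _
    simp only [Function.comp]
    rw [hgetD l]
    exact pvTermB source target _
  rw [hterm, hkeys]
  rw [← List.sum_toFinset _ (PySem.Set.nodup_ofList _)]
  rw [pvToFinset_ofList]
  -- align with pvTotal
  unfold pvTotal
  have hmaps : ((pvIrange n).map keyB).toFinset
      = ((List.range n).map (fun k => cid.getD k (-1))).toFinset := by
    rw [pvIrange, List.map_map]
    apply Finset.ext
    intro r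
    rw [List.mem_toFinset, List.mem_toFinset, List.mem_map, List.mem_map]
    constructor
    · rintro ⟨k, hk, rfl⟩
      refine ⟨k, hk, ?_⟩
      rw [List.mem_range] at hk
      simp only [Function.comp, hkeyB]
      rw [pvPyGetD hlen (by omega) (by exact_mod_cast hk), pvNrm_of_nonneg (by omega)]
      simp
    · rintro ⟨k, hk, rfl⟩
      refine ⟨k, hk, ?_⟩
      rw [List.mem_range] at hk
      simp only [Function.comp, hkeyB]
      rw [pvPyGetD hlen (by omega) (by exact_mod_cast hk), pvNrm_of_nonneg (by omega)]
      simp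
  rw [hmaps]
  apply Finset.sum_congr rfl
  intro r _
  have hfilter : (pvIrange n).filter (fun i => keyB i == r)
      = (pvIrange n).filter (fun i => cid.getD i.toNat (-1) == r) := by
    apply List.filter_congr
    intro i hi
    obtain ⟨h0, hlt⟩ := pvMem_irange.mp hi
    simp only [hkeyB]
    rw [pvPyGetD hlen (by omega) hlt, pvNrm_of_nonneg h0]
  rw [hfilter]

-- ===== VERDICT (by name: the statement is the Claim_ definition above) =====
theorem minimum_hamming_distance_spec : Claim_equal_minimum_hamming_distance := by
  intro source target allowed_swaps hdom hpre
  obtain ⟨hlen, hedges⟩ := hpre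
  show minimum_hamming_distance source target allowed_swaps
      = minimum_hamming_distance_alt source target allowed_swaps
  set n := source.length with hn
  -- A side: roots after the union loop have the model kernel
  have hker0 : ∀ i j, i < n → j < n →
      (pvRt n (pvIrange n) i = pvRt n (pvIrange n) j ↔ id i = id j) := by
    intro i j hi hj
    rw [pvInit_rt hi, pvInit_rt hj]
    simp
  obtain ⟨hg1, hkerA⟩ := pvFoldA allowed_swaps (pvIrange n) id hedges (pvInit_good n) hker0
  -- B side: DFS labels have the model kernel
  have hadj : pvAdjOk n (pvEdgesOf n allowed_swaps)
      (allowed_swaps.foldl pvAdjStep (List.replicate n ([] : List Int))) := by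
    have := pvAdjBuild allowed_swaps (List.replicate n ([] : List Int)) [] hedges
      (pvAdjOk_replicate n)
    simpa using this
  have hrepl_len : (List.replicate n (-1 : Int)).length = n := by simp
  have hrepl_get : ∀ j, j < n → (List.replicate n (-1 : Int)).getD j (-1) = -1 := by
    intro j hj
    rw [List.getD_eq_getElem _ _ (by simpa using hj)]
    simp
  obtain ⟨hlenB, hiffB, hkerB⟩ := pvOuterFold hadj n 0 (List.replicate n (-1 : Int)) 0
    (by omega) hrepl_len (by omega)
    (by
      intro j hj
      rw [hrepl_get j hj]
      constructor
      · intro h; exact absurd rfl h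
      · rintro ⟨i, hi, -⟩; omega)
    (by
      intro j hj h
      rw [hrepl_get j hj] at h
      exact absurd rfl h)
    (by
      intro i j hi hj hiv _
      rw [hrepl_get i hi] at hiv
      exact absurd rfl hiv)
  set cid := (((List.range' 0 n).map (fun j : Nat => (j : Int))).foldl
      (pvLabelStep (allowed_swaps.foldl pvAdjStep (List.replicate n ([] : List Int))) n)
      (List.replicate n (-1 : Int), 0)).1 with hcid
  have hcid_eq : cid = ((PySem.List.pyRange 0 ((n : Nat) : Int) 1).foldl
      (pvLabelStep (allowed_swaps.foldl pvAdjStep (List.replicate n ([] : List Int))) n)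
      (List.replicate n (-1 : Int), 0)).1 := by
    rw [hcid, pvPyRange_eq, pvIrange, List.range_eq_range']
  have hlab : ∀ j, j < n → cid.getD j (-1) ≠ -1 := by
    intro j hj
    exact (hiffB j hj).mpr ⟨j, by omega, rfl⟩
  rw [pvPortA_eq source target allowed_swaps hg1,
      pvPortB_eq source target allowed_swaps cid hlenB hcid_eq]
  apply pvTotal_ker
  intro i j hi hj
  have h1 : ((pvRt n (allowed_swaps.foldl pvAStepF (pvIrange n)) i : Nat) : Int)
        = ((pvRt n (allowed_swaps.foldl pvAStepF (pvIrange n)) j : Nat) : Int)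
      ↔ pvRt n (allowed_swaps.foldl pvAStepF (pvIrange n)) i
        = pvRt n (allowed_swaps.foldl pvAStepF (pvIrange n)) j := Int.natCast_inj
  rw [h1, hkerA i j hi hj]
  exact (hkerB i j hi hj (hlab i hi) (hlab j hj)).symm
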